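-- pv_equiv track=rewrite | github.com/Thomega35/AOC | 2023/J14/j14_2.py | cycle
-- ===== SOURCE A (Python) =====
-- def cycle(table) :
--     is_moving = True
--     # North
--     while is_moving:
--         is_moving = False
--         for row in range(len(table)):
--             rock_idexes = []
--             for col in range(len(table[row])):
--                 if table[row][col] == 'O':
--                     rock_idexes.append(col)
--             for rock in rock_idexes:
--                 if table[row-1][rock] == '.' and row > 0:
--                     table[row-1][rock] = 'O'
--                     table[row][rock] = '.'
--                     is_moving = True
--
--     is_moving = True
--     # West
--     while is_moving:
--         is_moving = False
--         for row in range(len(table)):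
--             rock_idexes = []
--             for col in range(len(table[row])):
--                 if table[row][col] == 'O':
--                     rock_idexes.append(col)
--             for rock in rock_idexes:
--                 if table[row][rock-1] == '.' and rock > 0:
--                     table[row][rock-1] = 'O'
--                     table[row][rock] = '.'
--                     is_moving = True
--
--     # South
--     is_moving = True
--     while is_moving:
--         is_moving = False
--         for row in range(len(table)-1, -1, -1):
--             rock_idexes = []
--             for col in range(len(table[row])):
--                 if table[row][col] == 'O':
--                     rock_idexes.append(col)
--             for rock in rock_idexes:
--                 if  row < len(table)-1 and table[row+1][rock] == '.':
--                     table[row+1][rock] = 'O'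
--                     table[row][rock] = '.'
--                     is_moving = True
--
--     # East
--     is_moving = True
--     while is_moving:
--         is_moving = False
--         for row in range(len(table)):
--             rock_idexes = []
--             for col in range(len(table[row])):
--                 if table[row][col] == 'O':
--                     rock_idexes.append(col)
--             for rock in rock_idexes:
--                 if rock < len(table[row])-1 and table[row][rock+1] == '.':
--                     table[row][rock+1] = 'O'
--                     table[row][rock] = '.'
--                     is_moving = True
--
--     return table
-- ===== SOURCE B (Python) =====
-- # B: one linear packing pass per row/column against '#'-style obstacles, instead of
-- # iterating one-step moves to a fixpoint.  Mutates `table` rows in place like A.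
-- def cycle(table):
--     def emit(run, front):
--         k = run.count('O')
--         if front:
--             return ['O'] * k + ['.'] * (len(run) - k)
--         return ['.'] * (len(run) - k) + ['O'] * k
--
--     def pack(line, front):
--         res, run = [], []
--         for cell in line:
--             if cell == 'O' or cell == '.':
--                 run.append(cell)
--             else:
--                 res += emit(run, front)
--                 res.append(cell)
--                 run = []
--         res += emit(run, front)
--         return res
--
--     if not table or not table[0] or not any('O' in row for row in table):
--         return table  # nothing can move
--     # North
--     cols = [pack(list(c), True) for c in zip(*table)]
--     grid = [list(r) for r in zip(*cols)]
--     # West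
--     grid = [pack(r, True) for r in grid]
--     # South
--     cols = [pack(list(c), False) for c in zip(*grid)]
--     grid = [list(r) for r in zip(*cols)]
--     # East
--     grid = [pack(r, False) for r in grid]
--     for i in range(len(table)):
--         table[i][:] = grid[i]
--     return table
-- ===== Notes on version B (the rewrite author's own statement) =====
-- stated objective: faster
-- what changed: A repeatedly sweeps the whole grid moving every rock one step until a fixpoint is reached for each of the four directions; B computes each tilted line directly in one linear pass per row/column, packing the rocks of each obstacle-delimited segment against the target wall (columns handled via transposition).
-- outside the precondition, e.g. on cycle([['O', '.'], ['.']]): A returns [['.', '.'], ['O']], B returns [['.'], ['O']]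
import Mathlib
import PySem

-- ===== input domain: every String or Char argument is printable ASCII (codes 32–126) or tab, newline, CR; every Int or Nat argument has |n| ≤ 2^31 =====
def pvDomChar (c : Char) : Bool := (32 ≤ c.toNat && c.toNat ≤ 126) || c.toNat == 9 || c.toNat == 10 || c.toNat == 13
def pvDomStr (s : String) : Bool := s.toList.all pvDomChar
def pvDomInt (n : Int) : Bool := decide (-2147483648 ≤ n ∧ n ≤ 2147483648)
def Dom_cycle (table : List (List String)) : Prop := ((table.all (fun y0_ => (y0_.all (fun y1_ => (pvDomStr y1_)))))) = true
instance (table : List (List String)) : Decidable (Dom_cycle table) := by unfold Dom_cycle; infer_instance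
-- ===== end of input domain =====

-- B replaces A's move-one-step-until-fixpoint sweeps by one linear packing pass per
-- row/column (objective: faster).  Equivalence is about the RETURN value; both A and
-- my Python B also mutate `table`'s rows in place to the same final contents.

-- ===== PORT A =====
-- rock_idexes of one row: `for col in range(len(row)): if row[col]=='O': append col`
def pvRocks (row : List String) : List Nat :=
  (List.range row.length).filter (fun c => row.getD c "" = "O")

-- table[r][c] read; pyGetD is Python-exact incl. negative wraparound (default "" is
-- only reached on ragged tables, which Pre_cycle excludes because A can raise there)
def pvGet (t : List (List String)) (r c : Int) : String :=
  PySem.List.pyGetD (PySem.List.pyGetD t r []) c ""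

-- table[r][c] = v
def pvSet (t : List (List String)) (r c : Nat) (v : String) : List (List String) :=
  t.set r ((t.getD r []).set c v)

-- one `for row in range(len(table)): …` body of A's North while-loop
def pvSweepN (t0 : List (List String)) : List (List String) × Bool :=
  (List.range t0.length).foldl (fun s (row : Nat) =>
    (pvRocks (s.1.getD row [])).foldl (fun s (rock : Nat) =>
      if pvGet s.1 ((row : Int) - 1) (rock : Int) = "." ∧ row > 0 then
        (pvSet (pvSet s.1 (row - 1) rock "O") row rock ".", true)
      else s) s) (t0, false)

def pvSweepW (t0 : List (List String)) : List (List String) × Bool :=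
  (List.range t0.length).foldl (fun s (row : Nat) =>
    (pvRocks (s.1.getD row [])).foldl (fun s (rock : Nat) =>
      if pvGet s.1 (row : Int) ((rock : Int) - 1) = "." ∧ rock > 0 then
        (pvSet (pvSet s.1 row (rock - 1) "O") row rock ".", true)
      else s) s) (t0, false)

-- `for row in range(len(table)-1, -1, -1)` is the reversed row range
def pvSweepS (t0 : List (List String)) : List (List String) × Bool :=
  ((List.range t0.length).reverse).foldl (fun s (row : Nat) =>
    (pvRocks (s.1.getD row [])).foldl (fun s (rock : Nat) =>
      if (row : Int) < PySem.List.len s.1 - 1 ∧ pvGet s.1 ((row : Int) + 1) (rock : Int) = "." then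
        (pvSet (pvSet s.1 (row + 1) rock "O") row rock ".", true)
      else s) s) (t0, false)

def pvSweepE (t0 : List (List String)) : List (List String) × Bool :=
  (List.range t0.length).foldl (fun s (row : Nat) =>
    (pvRocks (s.1.getD row [])).foldl (fun s (rock : Nat) =>
      if (rock : Int) < PySem.List.len (s.1.getD row []) - 1 ∧ pvGet s.1 (row : Int) ((rock : Int) + 1) = "." then
        (pvSet (pvSet s.1 row (rock + 1) "O") row rock ".", true)
      else s) s) (t0, false)

-- `is_moving = True; while is_moving: is_moving = False; <sweep>` — fuel makes the
-- loop total; the proofs below show the stated fuel always suffices to reach the fixpoint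
def pvWhile {α : Type} (step : α → α × Bool) : Nat → α → α
  | 0, t => t
  | fuel + 1, t => let s := step t; if s.2 then pvWhile step fuel s.1 else s.1

def pvCountO (l : List String) : Nat := l.count "O"

-- sum of the indices of the 'O' cells (a bound on the number of North/West sweeps)
def measF : List String → Nat
  | [] => 0
  | _ :: xs => measF xs + pvCountO xs

-- sum of the distances of the 'O' cells to the end (bound for South/East)
def measB : List String → Nat
  | [] => 0
  | x :: xs => (if x = "O" then xs.length else 0) + measB xs

def colAt (t : List (List String)) (c : Nat) : List String := t.map (fun row => row.getD c "")

def pvWidth (t : List (List String)) : Nat := (t.headD []).length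

def gmeasN (t : List (List String)) : Nat := ((List.range (pvWidth t)).map (fun c => measF (colAt t c))).sum
def gmeasW (t : List (List String)) : Nat := (t.map measF).sum
def gmeasS (t : List (List String)) : Nat := ((List.range (pvWidth t)).map (fun c => measB (colAt t c))).sum
def gmeasE (t : List (List String)) : Nat := (t.map measB).sum

def cycle (table : List (List String)) : List (List String) :=
  let t1 := pvWhile pvSweepN (gmeasN table + 1) table
  let t2 := pvWhile pvSweepW (gmeasW t1 + 1) t1
  let t3 := pvWhile pvSweepS (gmeasS t2 + 1) t2
  pvWhile pvSweepE (gmeasE t3 + 1) t3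

-- ===== PORT B =====
-- emit(run, front): the packed form of one obstacle-free segment
def pvEmit (front : Bool) (run : List String) : List String :=
  let k := run.count "O"
  if front then List.replicate k "O" ++ List.replicate (run.length - k) "."
  else List.replicate (run.length - k) "." ++ List.replicate k "O"

-- pack(line, front): one fold over the line with state (res, run)
def packLoop (front : Bool) (l : List String) : List String :=
  let s := l.foldl (fun (s : List String × List String) cell =>
    if cell = "O" ∨ cell = "." then (s.1, s.2 ++ [cell])
    else (s.1 ++ pvEmit front s.2 ++ [cell], ([] : List String))) ([], [])
  s.1 ++ pvEmit front s.2

-- zip(*g) (exact for the rectangular tables Pre_cycle admits)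
def pvTr (g : List (List String)) : List (List String) :=
  (List.range (g.headD []).length).map (fun c => g.map (fun row => row.getD c ""))

def cycle_alt (table : List (List String)) : List (List String) :=
  if table = [] ∨ table.headD [] = [] ∨ table.any (fun row => row.contains "O") = false then table
  else
    let g1 := pvTr ((pvTr table).map (packLoop true))
    let g2 := g1.map (packLoop true)
    let g3 := pvTr ((pvTr g2).map (packLoop false))
    g3.map (packLoop false)

-- ===== PRECONDITION & SPEC =====
-- Pre_cycle admits the rectangular tables (all rows of equal length) and the
-- rock-free tables (no 'O' anywhere, on which A touches nothing and returns its
-- input): on other ragged tables A's unguarded reads table[row-1][rock] /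
-- table[row+1][rock] can raise IndexError, and on those where wraparound makes A
-- return anyway, its value is an accident my B (built on zip(*table)) does not
-- reproduce.
def Pre_cycle (table : List (List String)) : Prop :=
  (table.all (fun row => row.length == (table.headD []).length) ||
   !(table.any (fun row => row.contains "O"))) = true
instance (table : List (List String)) : Decidable (Pre_cycle table) := by unfold Pre_cycle; infer_instance

def pvWitness_cycle : List (List String) := [["O", ".", "#"], [".", "O", "."]]

def Spec_cycle (table : List (List String)) (out : List (List String)) : Prop := out = cycle_alt table
instance (table : List (List String)) (out : List (List String)) : Decidable (Spec_cycle table out) := by unfold Spec_cycle; infer_instance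

-- ===== CLAIM (what is proved, stated in full; the proofs are below) =====
def Claim_equal_cycle : Prop := ∀ (table : List (List String)), Dom_cycle table → Pre_cycle table → Spec_cycle table (cycle table)

-- ===== LEMMAS AND PROOFS =====


-- ---------- 1D layer: structural forms of one sweep and of the packed fixpoint ----------

-- insert one '.' after the leading run of 'O's
def pushDot : List String → List String
  | [] => ["."]
  | s :: m => if s = "O" then "O" :: pushDot m else "." :: s :: m

-- insert one 'O' after the leading run of '.'s
def pushO : List String → List String
  | [] => ["O"]
  | s :: m => if s = "." then "." :: pushO m else "O" :: s :: m

-- each obstacle-free segment packed as O…O.….  (front packing)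
def packF : List String → List String
  | [] => []
  | x :: xs => if x = "O" then "O" :: packF xs else if x = "." then pushDot (packF xs) else x :: packF xs

-- each obstacle-free segment packed as .….O…O  (back packing)
def packB : List String → List String
  | [] => []
  | x :: xs => if x = "O" then pushO (packB xs) else if x = "." then "." :: packB xs else x :: packB xs

-- one North/West sweep of A on a single line (ascending, cascading)
def scanM : List String → List String × Bool
  | [] => ([], false)
  | [x] => ([x], false)
  | x :: y :: rest =>
    if x = "." ∧ y = "O" then ("O" :: (scanM ("." :: rest)).1, true)
    else (x :: (scanM (y :: rest)).1, (scanM (y :: rest)).2)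
termination_by l => l.length

-- one East sweep of A on a single line (snapshot rock list, guarded right check)
def eScanM : List String → List String × Bool
  | [] => ([], false)
  | [x] => ([x], false)
  | x :: y :: rest =>
    if x = "O" ∧ y = "." then ("." :: "O" :: (eScanM rest).1, true)
    else (x :: (eScanM (y :: rest)).1, (eScanM (y :: rest)).2)
termination_by l => l.length

-- one South sweep of A on a single column (descending, cascading)
def sscanM : List String → List String × Bool
  | [] => ([], false)
  | x :: xs =>
    match sscanM xs with
    | (y :: rest, f) => if x = "O" ∧ y = "." then ("." :: "O" :: rest, true) else (x :: y :: rest, f)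
    | ([], f) => ([x], f)

lemma packF_cons (x : String) (z : List String) :
    packF (x :: z) = if x = "O" then "O" :: packF z else if x = "." then pushDot (packF z) else x :: packF z := by
  rw [packF]

lemma packB_cons (x : String) (z : List String) :
    packB (x :: z) = if x = "O" then pushO (packB z) else if x = "." then "." :: packB z else x :: packB z := by
  rw [packB]

lemma length_pushDot (m : List String) : (pushDot m).length = m.length + 1 := by
  induction m with
  | nil => simp [pushDot]
  | cons s m ih => simp only [pushDot]; split <;> simp [ih]

lemma length_packF (l : List String) : (packF l).length = l.length := by
  induction l with
  | nil => simp [packF]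
  | cons x xs ih => simp only [packF]; split <;> [skip; split] <;> simp [length_pushDot, ih]

lemma length_eScanM (l : List String) : (eScanM l).1.length = l.length := by
  induction l using eScanM.induct with
  | case1 => simp [eScanM]
  | case2 => simp [eScanM]
  | case3 x y rest h ih => simp [eScanM, h, ih]
  | case4 x y rest h ih => simp [eScanM, h, ih]

lemma length_sscanM (l : List String) : (sscanM l).1.length = l.length := by
  induction l with
  | nil => simp [sscanM]
  | cons x xs ih =>
    rcases hs : sscanM xs with ⟨s1, f⟩
    rw [hs] at ih
    rcases s1 with _ | ⟨y, rest⟩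
    · rw [show sscanM (x :: xs) = ([x], f) by rw [sscanM, hs]]
      simp [← ih]
    · rw [show sscanM (x :: xs) = if x = "O" ∧ y = "." then ("." :: "O" :: rest, true) else (x :: y :: rest, f) by
        rw [sscanM, hs]]
      split <;> simp at ih ⊢ <;> omega


lemma pushDot_O (m : List String) : pushDot ("O" :: m) = "O" :: pushDot m := by simp [pushDot]

lemma pushDot_ne {s : String} (m : List String) (h : ¬ s = "O") : pushDot (s :: m) = "." :: s :: m := by
  simp [pushDot, h]

lemma pushO_dot (m : List String) : pushO ("." :: m) = "." :: pushO m := by simp [pushO]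

lemma pushO_ne {s : String} (m : List String) (h : ¬ s = ".") : pushO (s :: m) = "O" :: s :: m := by
  simp [pushO, h]

lemma packF_cons_congr (x : String) {z1 z2 : List String} (h : packF z1 = packF z2) :
    packF (x :: z1) = packF (x :: z2) := by
  simp only [packF, h]

lemma packB_cons_congr (x : String) {z1 z2 : List String} (h : packB z1 = packB z2) :
    packB (x :: z1) = packB (x :: z2) := by
  simp only [packB, h]

lemma pvCountO_cons (x : String) (xs : List String) :
    pvCountO (x :: xs) = pvCountO xs + (if x = "O" then 1 else 0) := by
  simp [pvCountO, List.count_cons, beq_iff_eq]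

lemma pvCountO_scanM (l : List String) : pvCountO (scanM l).1 = pvCountO l := by
  induction l using scanM.induct with
  | case1 => simp [scanM]
  | case2 => simp [scanM]
  | case3 x y rest h ih =>
    obtain ⟨hx, hy⟩ := h
    subst hx; subst hy
    simp [scanM, pvCountO_cons, ih]
  | case4 x y rest h ih => simp [scanM, h, pvCountO_cons, ih]

lemma measF_scanM (l : List String) :
    measF (scanM l).1 + (if (scanM l).2 then 1 else 0) ≤ measF l := by
  induction l using scanM.induct with
  | case1 => simp [scanM, measF]
  | case2 => simp [scanM, measF]
  | case3 x y rest h ih =>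
    obtain ⟨hx, hy⟩ := h
    subst hx; subst hy
    have hc := pvCountO_scanM ("." :: rest)
    simp [scanM, measF, pvCountO_cons] at hc ih ⊢
    omega
  | case4 x y rest h ih =>
    rw [show scanM (x :: y :: rest) = (x :: (scanM (y :: rest)).1, (scanM (y :: rest)).2) by simp [scanM, h]]
    have hc := pvCountO_scanM (y :: rest)
    cases hf : (scanM (y :: rest)).2 <;>
      rw [hf] at ih <;> simp only [hf, measF, hc] at ih ⊢ <;> simp at ih ⊢ <;> omega

lemma measB_eScanM (l : List String) :
    measB (eScanM l).1 + (if (eScanM l).2 then 1 else 0) ≤ measB l := by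
  induction l using eScanM.induct with
  | case1 => simp [eScanM, measB]
  | case2 => simp [eScanM, measB]
  | case3 x y rest h ih =>
    obtain ⟨hx, hy⟩ := h
    subst hx; subst hy
    have hl := length_eScanM rest
    simp [eScanM, measB, hl] at ih ⊢
    omega
  | case4 x y rest h ih =>
    rw [show eScanM (x :: y :: rest) = (x :: (eScanM (y :: rest)).1, (eScanM (y :: rest)).2) by simp [eScanM, h]]
    have hl := length_eScanM (y :: rest)
    cases hf : (eScanM (y :: rest)).2 <;>
      rw [hf] at ih <;> simp only [hf, measB, hl] at ih ⊢ <;> simp at ih ⊢ <;> omega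

lemma sscanM_nil_case {xs : List String} {f : Bool} (hs : sscanM xs = ([], f)) :
    xs = [] ∧ f = false := by
  have hl := length_sscanM xs
  rw [hs] at hl
  have hx : xs = [] := by
    cases xs with
    | nil => rfl
    | cons a as => simp at hl
  subst hx
  simp [sscanM] at hs
  exact ⟨rfl, hs⟩

lemma measB_sscanM (l : List String) :
    measB (sscanM l).1 + (if (sscanM l).2 then 1 else 0) ≤ measB l := by
  induction l with
  | nil => simp [sscanM, measB]
  | cons x xs ih =>
    rcases hs : sscanM xs with ⟨s1, f⟩
    rw [hs] at ih
    rcases s1 with _ | ⟨y, rest⟩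
    · obtain ⟨hx, hf⟩ := sscanM_nil_case hs
      subst hx; subst hf
      rw [show sscanM (x :: []) = ([x], false) by rw [sscanM]; simp [sscanM]]
      simp [measB]
    · have hl := length_sscanM xs
      rw [hs] at hl
      rw [show sscanM (x :: xs) = if x = "O" ∧ y = "." then ("." :: "O" :: rest, true) else (x :: y :: rest, f) by
        rw [sscanM, hs]]
      by_cases hxy : x = "O" ∧ y = "."
      · obtain ⟨hx, hy⟩ := hxy
        subst hx; subst hy
        rw [if_pos (And.intro rfl rfl)]
        simp [measB] at ih hl ⊢
        omega
      · rw [if_neg hxy]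
        cases f <;> simp [measB] at ih hl ⊢ <;> split <;> omega

lemma packF_scanM (l : List String) : packF (scanM l).1 = packF l := by
  induction l using scanM.induct with
  | case1 => simp [scanM]
  | case2 => simp [scanM]
  | case3 x y rest h ih =>
    obtain ⟨hx, hy⟩ := h
    subst hx; subst hy
    rw [show scanM ("." :: "O" :: rest) = ("O" :: (scanM ("." :: rest)).1, true) by simp [scanM]]
    show packF ("O" :: (scanM ("." :: rest)).1) = packF ("." :: "O" :: rest)
    rw [show packF ("O" :: (scanM ("." :: rest)).1) = "O" :: packF (scanM ("." :: rest)).1 by simp [packF]]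
    rw [ih]
    simp [packF, pushDot_O]
  | case4 x y rest h ih =>
    rw [show scanM (x :: y :: rest) = (x :: (scanM (y :: rest)).1, (scanM (y :: rest)).2) by simp [scanM, h]]
    exact packF_cons_congr x ih

lemma packB_eScanM (l : List String) : packB (eScanM l).1 = packB l := by
  induction l using eScanM.induct with
  | case1 => simp [eScanM]
  | case2 => simp [eScanM]
  | case3 x y rest h ih =>
    obtain ⟨hx, hy⟩ := h
    subst hx; subst hy
    rw [show eScanM ("O" :: "." :: rest) = ("." :: "O" :: (eScanM rest).1, true) by simp [eScanM]]
    show packB ("." :: "O" :: (eScanM rest).1) = packB ("O" :: "." :: rest)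
    rw [show packB ("." :: "O" :: (eScanM rest).1) = "." :: pushO (packB (eScanM rest).1) by simp [packB]]
    rw [ih]
    simp [packB, pushO_dot]
  | case4 x y rest h ih =>
    rw [show eScanM (x :: y :: rest) = (x :: (eScanM (y :: rest)).1, (eScanM (y :: rest)).2) by simp [eScanM, h]]
    exact packB_cons_congr x ih

lemma packB_sscanM (l : List String) : packB (sscanM l).1 = packB l := by
  induction l with
  | nil => simp [sscanM]
  | cons x xs ih =>
    rcases hs : sscanM xs with ⟨s1, f⟩
    rw [hs] at ih
    rcases s1 with _ | ⟨y, rest⟩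
    · obtain ⟨hx, hf⟩ := sscanM_nil_case hs
      subst hx
      rw [show sscanM (x :: []) = ([x], f) by rw [sscanM, hs]]
    · rw [show sscanM (x :: xs) = if x = "O" ∧ y = "." then ("." :: "O" :: rest, true) else (x :: y :: rest, f) by
        rw [sscanM, hs]]
      split
      · rename_i hxy
        obtain ⟨hx, hy⟩ := hxy
        subst hx; subst hy
        rw [show packB ("." :: "O" :: rest) = "." :: pushO (packB rest) by simp [packB]]
        rw [show packB ("O" :: xs) = pushO (packB xs) by simp [packB]]
        rw [← ih]
        simp [packB, pushO_dot]
      · exact packB_cons_congr x ih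

lemma packF_singleton (x : String) : packF [x] = [x] := by
  by_cases hO : x = "O"
  · simp [packF, hO]
  · by_cases hd : x = "."
    · simp [packF, hO, hd, pushDot]
    · simp [packF, hO, hd]

lemma packB_singleton (x : String) : packB [x] = [x] := by
  by_cases hO : x = "O"
  · simp [packB, hO, pushO]
  · by_cases hd : x = "."
    · simp [packB, hO, hd]
    · simp [packB, hO, hd]

lemma scanM_fix (l : List String) (h : (scanM l).2 = false) : (scanM l).1 = l ∧ packF l = l := by
  induction l using scanM.induct with
  | case1 => simp [scanM, packF]
  | case2 x => exact ⟨by simp [scanM], packF_singleton x⟩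
  | case3 x y rest hxy ih => simp [scanM, hxy] at h
  | case4 x y rest hxy ih =>
    rw [show scanM (x :: y :: rest) = (x :: (scanM (y :: rest)).1, (scanM (y :: rest)).2) by simp [scanM, hxy]] at h ⊢
    obtain ⟨h1, h2⟩ := ih h
    refine ⟨by simp [h1], ?_⟩
    rw [packF_cons, h2]
    by_cases hO : x = "O"
    · simp [hO]
    · by_cases hd : x = "."
      · have hy : ¬ y = "O" := fun hy => hxy ⟨hd, hy⟩
        simp [hO, hd, pushDot_ne _ hy]
      · simp [hO, hd]

lemma eScanM_fix (l : List String) (h : (eScanM l).2 = false) : (eScanM l).1 = l ∧ packB l = l := by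
  induction l using eScanM.induct with
  | case1 => simp [eScanM, packB]
  | case2 x => exact ⟨by simp [eScanM], packB_singleton x⟩
  | case3 x y rest hxy ih => simp [eScanM, hxy] at h
  | case4 x y rest hxy ih =>
    rw [show eScanM (x :: y :: rest) = (x :: (eScanM (y :: rest)).1, (eScanM (y :: rest)).2) by simp [eScanM, hxy]] at h ⊢
    obtain ⟨h1, h2⟩ := ih h
    refine ⟨by simp [h1], ?_⟩
    rw [packB_cons, h2]
    by_cases hO : x = "O"
    · have hy : ¬ y = "." := fun hy => hxy ⟨hO, hy⟩
      simp [hO, pushO_ne _ hy]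
    · by_cases hd : x = "."
      · simp [hO, hd]
      · simp [hO, hd]

lemma sscanM_fix (l : List String) (h : (sscanM l).2 = false) : (sscanM l).1 = l ∧ packB l = l := by
  induction l with
  | nil => simp [sscanM, packB]
  | cons x xs ih =>
    rcases hs : sscanM xs with ⟨s1, f⟩
    rw [hs] at ih
    rcases s1 with _ | ⟨y, rest⟩
    · obtain ⟨hx, hf⟩ := sscanM_nil_case hs
      subst hx
      rw [show sscanM (x :: []) = ([x], f) by rw [sscanM, hs]] at h ⊢
      exact ⟨rfl, packB_singleton x⟩
    · rw [show sscanM (x :: xs) = if x = "O" ∧ y = "." then ("." :: "O" :: rest, true) else (x :: y :: rest, f) by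
        rw [sscanM, hs]] at h ⊢
      by_cases hxy : x = "O" ∧ y = "."
      · simp [hxy] at h
      · rw [if_neg hxy] at h ⊢
        simp only at h
        have h1 : y :: rest = xs := by simpa using (ih h).1
        have h2 : packB xs = xs := (ih h).2
        constructor
        · simp [h1]
        · rw [packB_cons, h2]
          by_cases hO : x = "O"
          · have hy : ¬ y = "." := fun hy => hxy ⟨hO, hy⟩
            rw [if_pos hO, ← h1, pushO_ne _ hy, hO, h1]
          · by_cases hd : x = "."
            · simp [hO, hd]
            · simp [hO, hd]


-- ---------- bridge: B's fold-with-run-buffer pack equals the structural packF/packB ----------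

lemma pushDot_emit (k m : Nat) (z : List String) (hz : z.head? ≠ some "O") :
    pushDot (List.replicate k "O" ++ (List.replicate m "." ++ z)) =
      List.replicate k "O" ++ (List.replicate (m + 1) "." ++ z) := by
  induction k with
  | zero =>
    cases m with
    | zero =>
      cases z with
      | nil => simp [pushDot]
      | cons c w =>
        have hc : ¬ c = "O" := by simpa using fun h => hz (by simp [h])
        simp [pushDot_ne _ hc]
    | succ m => simp [List.replicate_succ, pushDot_ne _ (by decide : ¬ ("." : String) = "O")]
  | succ k ih => simp [List.replicate_succ, pushDot_O, ih]

lemma pushO_emit (m k : Nat) (z : List String) (hz : z.head? ≠ some ".") :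
    pushO (List.replicate m "." ++ (List.replicate k "O" ++ z)) =
      List.replicate m "." ++ (List.replicate (k + 1) "O" ++ z) := by
  induction m with
  | zero =>
    cases k with
    | zero =>
      cases z with
      | nil => simp [pushO]
      | cons c w =>
        have hc : ¬ c = "." := by simpa using fun h => hz (by simp [h])
        simp [pushO_ne _ hc]
    | succ k => simp [List.replicate_succ, pushO_ne _ (by decide : ¬ ("O" : String) = ".")]
  | succ m ih => simp [List.replicate_succ, pushO_dot, ih]

lemma count_le_len (run : List String) : run.count "O" ≤ run.length := List.count_le_length

lemma pushDot_reps (k m : Nat) :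
    pushDot (List.replicate k "O" ++ List.replicate m ".") =
      List.replicate k "O" ++ List.replicate (m + 1) "." := by
  have h := pushDot_emit k m [] (by simp)
  simpa using h

lemma pushO_reps (m k : Nat) :
    pushO (List.replicate m "." ++ List.replicate k "O") =
      List.replicate m "." ++ List.replicate (k + 1) "O" := by
  have h := pushO_emit m k [] (by simp)
  simpa using h

lemma packF_free (run : List String) (h : ∀ s ∈ run, s = "O" ∨ s = ".") :
    packF run = pvEmit true run := by
  induction run with
  | nil => simp [packF, pvEmit]
  | cons x rest ih =>
    have hrest := fun s hs => h s (List.mem_cons_of_mem _ hs)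
    have hk := count_le_len rest
    rcases h x List.mem_cons_self with hO | hd
    · subst hO
      rw [packF_cons, if_pos rfl, ih hrest]
      simp [pvEmit, List.count_cons, List.replicate_succ]
    · subst hd
      rw [packF_cons, if_neg (by decide), if_pos rfl, ih hrest]
      simp only [pvEmit, if_true]
      rw [show ("." :: rest).count "O" = rest.count "O" by simp [List.count_cons]]
      rw [pushDot_reps]
      rw [show ("." :: rest).length - rest.count "O" = rest.length - rest.count "O" + 1 by
        simp only [List.length_cons]; omega]

lemma packF_seg (run : List String) (c : String) (l : List String)
    (h : ∀ s ∈ run, s = "O" ∨ s = ".") (hc : ¬ (c = "O" ∨ c = ".")) :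
    packF (run ++ c :: l) = pvEmit true run ++ c :: packF l := by
  induction run with
  | nil =>
    rw [List.nil_append, packF_cons, if_neg (fun h => hc (Or.inl h)), if_neg (fun h => hc (Or.inr h))]
    simp [pvEmit]
  | cons x rest ih =>
    have hrest := fun s hs => h s (List.mem_cons_of_mem _ hs)
    have hk := count_le_len rest
    rcases h x List.mem_cons_self with hO | hd
    · subst hO
      rw [List.cons_append, packF_cons, if_pos rfl, ih hrest]
      simp [pvEmit, List.count_cons, List.replicate_succ]
    · subst hd
      rw [List.cons_append, packF_cons, if_neg (by decide), if_pos rfl, ih hrest]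
      simp only [pvEmit, if_true]
      rw [show ("." :: rest).count "O" = rest.count "O" by simp [List.count_cons]]
      rw [List.append_assoc, pushDot_emit _ _ (c :: packF l) (by
        simp only [List.head?_cons, ne_eq, Option.some.injEq]
        exact fun h => hc (Or.inl h))]
      rw [show ("." :: rest).length - rest.count "O" = rest.length - rest.count "O" + 1 by
        simp only [List.length_cons]; omega]
      simp [List.append_assoc]

lemma packB_free (run : List String) (h : ∀ s ∈ run, s = "O" ∨ s = ".") :
    packB run = pvEmit false run := by
  induction run with
  | nil => simp [packB, pvEmit]
  | cons x rest ih =>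
    have hrest := fun s hs => h s (List.mem_cons_of_mem _ hs)
    have hk := count_le_len rest
    rcases h x List.mem_cons_self with hO | hd
    · subst hO
      rw [packB_cons, if_pos rfl, ih hrest]
      simp only [pvEmit, Bool.false_eq_true, if_false]
      rw [show ("O" :: rest).count "O" = rest.count "O" + 1 by simp [List.count_cons]]
      rw [pushO_reps]
      rw [show ("O" :: rest).length - (rest.count "O" + 1) = rest.length - rest.count "O" by
        simp only [List.length_cons]; omega]
    · subst hd
      rw [packB_cons, if_neg (by decide), if_pos rfl, ih hrest]
      simp only [pvEmit, Bool.false_eq_true, if_false]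
      rw [show ("." :: rest).count "O" = rest.count "O" by simp [List.count_cons]]
      rw [show ("." :: rest).length - rest.count "O" = rest.length - rest.count "O" + 1 by
        simp only [List.length_cons]; omega]
      simp [List.replicate_succ]

lemma packB_seg (run : List String) (c : String) (l : List String)
    (h : ∀ s ∈ run, s = "O" ∨ s = ".") (hc : ¬ (c = "O" ∨ c = ".")) :
    packB (run ++ c :: l) = pvEmit false run ++ c :: packB l := by
  induction run with
  | nil =>
    rw [List.nil_append, packB_cons, if_neg (fun h => hc (Or.inl h)), if_neg (fun h => hc (Or.inr h))]
    simp [pvEmit]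
  | cons x rest ih =>
    have hrest := fun s hs => h s (List.mem_cons_of_mem _ hs)
    have hk := count_le_len rest
    rcases h x List.mem_cons_self with hO | hd
    · subst hO
      rw [List.cons_append, packB_cons, if_pos rfl, ih hrest]
      simp only [pvEmit, Bool.false_eq_true, if_false]
      rw [show ("O" :: rest).count "O" = rest.count "O" + 1 by simp [List.count_cons]]
      rw [List.append_assoc, pushO_emit _ _ (c :: packB l) (by
        simp only [List.head?_cons, ne_eq, Option.some.injEq]
        exact fun h => hc (Or.inr h))]
      rw [show ("O" :: rest).length - (rest.count "O" + 1) = rest.length - rest.count "O" by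
        simp only [List.length_cons]; omega]
      simp [List.append_assoc]
    · subst hd
      rw [List.cons_append, packB_cons, if_neg (by decide), if_pos rfl, ih hrest]
      simp only [pvEmit, Bool.false_eq_true, if_false]
      rw [show ("." :: rest).count "O" = rest.count "O" by simp [List.count_cons]]
      rw [show ("." :: rest).length - rest.count "O" = rest.length - rest.count "O" + 1 by
        simp only [List.length_cons]; omega]
      simp [List.replicate_succ]

lemma packLoop_go (front : Bool) (l : List String) (res run : List String)
    (hrun : ∀ s ∈ run, s = "O" ∨ s = ".") :
    (let s := l.foldl (fun (s : List String × List String) cell =>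
        if cell = "O" ∨ cell = "." then (s.1, s.2 ++ [cell])
        else (s.1 ++ pvEmit front s.2 ++ [cell], ([] : List String))) (res, run)
     s.1 ++ pvEmit front s.2) =
      res ++ (if front then packF (run ++ l) else packB (run ++ l)) := by
  induction l generalizing res run with
  | nil =>
    cases front
    · simp [packB_free run hrun]
    · simp [packF_free run hrun]
  | cons c l ih =>
    by_cases hc : c = "O" ∨ c = "."
    · simp only [List.foldl_cons, if_pos hc]
      rw [ih res (run ++ [c]) (by
        intro s hs
        rcases List.mem_append.1 hs with h | h
        · exact hrun s h
        · simp at h; subst h; exact hc)]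
      simp
    · simp only [List.foldl_cons, if_neg hc]
      rw [ih (res ++ pvEmit front run ++ [c]) [] (by simp)]
      cases front
      · simp [packB_seg run c l hrun hc]
      · simp [packF_seg run c l hrun hc]

lemma packLoop_true (l : List String) : packLoop true l = packF l := by
  have := packLoop_go true l [] [] (by simp)
  simpa [packLoop] using this

lemma packLoop_false (l : List String) : packLoop false l = packB l := by
  have := packLoop_go false l [] [] (by simp)
  simpa [packLoop] using this


-- ---------- generic helpers: list surgery, flag threading, the while-loop principle ----------

lemma getD_off {α : Type} (pre ys : List α) (k : Nat) (d : α) :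
    (pre ++ ys).getD (pre.length + k) d = ys.getD k d := by
  simp [List.getD_eq_getElem?_getD, List.getElem?_append_right (Nat.le_add_right _ _)]

lemma set_off {α : Type} (pre ys : List α) (k : Nat) (v : α) :
    (pre ++ ys).set (pre.length + k) v = pre ++ ys.set k v := by simp

lemma getD_set_self {α : Type} (g : List α) (r : Nat) (x d : α) (h : r < g.length) :
    (g.set r x).getD r d = x := by
  rw [List.getD_eq_getElem?_getD, List.getElem?_set_self h]
  rfl

lemma pvWhile_eq_pack {α : Type} (step : α → α × Bool) (pack : α → α) (meas : α → Nat)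
    (Inv : α → Prop)
    (hinv : ∀ t, Inv t → Inv (step t).1)
    (hpres : ∀ t, Inv t → pack (step t).1 = pack t)
    (hfix : ∀ t, Inv t → (step t).2 = false → (step t).1 = t ∧ pack t = t)
    (hdec : ∀ t, Inv t → (step t).2 = true → meas (step t).1 < meas t) :
    ∀ (fuel : Nat) (t : α), Inv t → meas t < fuel → pvWhile step fuel t = pack t := by
  intro fuel
  induction fuel with
  | zero => intro t _ h; omega
  | succ n ih =>
    intro t hI hm
    simp only [pvWhile]
    cases hs : (step t).2
    · simp only [Bool.false_eq_true, if_false]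
      obtain ⟨h1, h2⟩ := hfix t hI hs
      rw [h1, h2]
    · simp only [if_true]
      rw [ih (step t).1 (hinv t hI) (by have := hdec t hI hs; omega), hpres t hI]

-- ---------- rock-index bookkeeping ----------

lemma pvRocks_cons (x : String) (xs : List String) :
    pvRocks (x :: xs) = (if x = "O" then [0] else []) ++ (pvRocks xs).map (fun c => c + 1) := by
  simp only [pvRocks, List.length_cons, List.range_succ_eq_map, List.filter_cons,
    List.filter_map]
  by_cases hx : x = "O" <;>
    simp [hx, Function.comp_def] <;>
    exact List.map_congr_left (fun c _ => rfl)

lemma pvRocks_cons_O (xs : List String) :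
    pvRocks ("O" :: xs) = 0 :: (pvRocks xs).map (fun c => c + 1) := by
  rw [pvRocks_cons]; simp

lemma pvRocks_cons_ne (x : String) (xs : List String) (h : ¬ x = "O") :
    pvRocks (x :: xs) = (pvRocks xs).map (fun c => c + 1) := by
  rw [pvRocks_cons]; simp [h]

-- ---------- West / East: one row processed by A = one structural scan ----------

-- the inner rock loop of A's West sweep, restricted to the row it touches
def wOp (s : List String × Bool) (rock : Nat) : List String × Bool :=
  if PySem.List.pyGetD s.1 ((rock : Int) - 1) "" = "." ∧ rock > 0 then
    ((s.1.set (rock - 1) "O").set rock ".", true)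
  else s

-- the inner rock loop of A's East sweep, restricted to the row it touches
def eOp (s : List String × Bool) (rock : Nat) : List String × Bool :=
  if (rock : Int) < PySem.List.len s.1 - 1 ∧ PySem.List.pyGetD s.1 ((rock : Int) + 1) "" = "." then
    ((s.1.set (rock + 1) "O").set rock ".", true)
  else s

lemma wG (xs : List String) : ∀ (pre : List String) (x : String) (m : Bool),
    ((pvRocks xs).map (fun c => c + (pre.length + 1))).foldl wOp (pre ++ x :: xs, m) =
      (pre ++ (scanM (x :: xs)).1, m || (scanM (x :: xs)).2) := by
  induction xs with
  | nil => intro pre x m; simp [pvRocks, scanM]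
  | cons y rest ih =>
    intro pre x m
    have hmap : ∀ (w : String), (pvRocks rest).map ((fun c => c + (pre.length + 1)) ∘ (fun c => c + 1)) =
        (pvRocks rest).map (fun c => c + ((pre ++ [w]).length + 1)) := fun w =>
      List.map_congr_left (fun c _ => by simp [Function.comp]; omega)
    by_cases hy : y = "O"
    · subst hy
      rw [pvRocks_cons_O, List.map_cons, List.map_map, List.foldl_cons, Nat.zero_add]
      have hgetx : PySem.List.pyGetD (pre ++ x :: "O" :: rest) (((pre.length + 1 : Nat) : Int) - 1) "" = x := by
        have h1 : ((pre.length + 1 : Nat) : Int) - 1 = ((pre.length : Nat) : Int) := by push_cast; ring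
        rw [h1, PySem.List.pyGetD_natCast, ← Nat.add_zero pre.length, getD_off]
        rfl
      by_cases hx : x = "."
      · rw [show wOp (pre ++ x :: "O" :: rest, m) (pre.length + 1) =
            (pre ++ "O" :: "." :: rest, true) from by
          rw [wOp, if_pos ⟨by rw [hgetx, hx], by omega⟩]
          rw [show pre.length + 1 - 1 = pre.length + 0 from by omega, set_off,
            show pre.length + 1 = pre.length + 1 from rfl, set_off]
          simp]
        rw [hmap "O",
          show pre ++ "O" :: "." :: rest = (pre ++ ["O"]) ++ "." :: rest from by simp,
          ih (pre ++ ["O"]) "." true]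
        rw [show scanM (x :: "O" :: rest) = ("O" :: (scanM ("." :: rest)).1, true) from by
          rw [hx]; simp [scanM]]
        simp
      · rw [show wOp (pre ++ x :: "O" :: rest, m) (pre.length + 1) = (pre ++ x :: "O" :: rest, m) from by
          rw [wOp, if_neg (fun hh => hx (by rw [← hgetx]; exact hh.1))]]
        rw [hmap x,
          show pre ++ x :: "O" :: rest = (pre ++ [x]) ++ "O" :: rest from by simp,
          ih (pre ++ [x]) "O" m]
        rw [show scanM (x :: "O" :: rest) = (x :: (scanM ("O" :: rest)).1, (scanM ("O" :: rest)).2) from by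
          rw [scanM, if_neg (fun hh => hx hh.1)]]
        simp
    · rw [pvRocks_cons_ne y rest hy, List.map_map]
      rw [hmap x,
        show pre ++ x :: y :: rest = (pre ++ [x]) ++ y :: rest from by simp,
        ih (pre ++ [x]) y m]
      rw [show scanM (x :: y :: rest) = (x :: (scanM (y :: rest)).1, (scanM (y :: rest)).2) from by
        rw [scanM, if_neg (fun hh => hy hh.2)]]
      simp

lemma eG (l : List String) : ∀ (pre : List String) (m : Bool),
    ((pvRocks l).map (fun c => c + pre.length)).foldl eOp (pre ++ l, m) =
      (pre ++ (eScanM l).1, m || (eScanM l).2) := by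
  induction l using eScanM.induct with
  | case1 => intro pre m; simp [pvRocks, eScanM]
  | case2 x =>
    intro pre m
    by_cases hx : x = "O"
    · subst hx
      rw [show pvRocks ["O"] = [0] from by decide]
      simp only [List.map_cons, List.map_nil, List.foldl_cons, List.foldl_nil, Nat.zero_add]
      rw [show eOp (pre ++ ["O"], m) pre.length = (pre ++ ["O"], m) from by
        rw [eOp, if_neg (by
          rintro ⟨h1, -⟩
          rw [PySem.List.len_eq] at h1
          simp at h1)]]
      simp [eScanM]
    · rw [show pvRocks [x] = [] from by simp [pvRocks, hx]]
      simp [eScanM]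
  | case3 x y rest h ih =>
    intro pre m
    obtain ⟨hx, hy⟩ := h
    subst hx; subst hy
    rw [pvRocks_cons_O, List.map_cons, List.map_map, List.foldl_cons, Nat.zero_add]
    rw [show eOp (pre ++ "O" :: "." :: rest, m) pre.length = (pre ++ "." :: "O" :: rest, true) from by
      rw [eOp, if_pos ⟨by rw [PySem.List.len_eq]; simp; omega, by
        rw [show ((pre.length : Nat) : Int) + 1 = ((pre.length + 1 : Nat) : Int) from by push_cast; ring,
          PySem.List.pyGetD_natCast, getD_off]
        rfl⟩]
      rw [show pre.length + 1 = pre.length + 1 from rfl, set_off, ← Nat.add_zero pre.length, set_off]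
      simp]
    rw [pvRocks_cons_ne "." rest (by decide), List.map_map]
    rw [show (pvRocks rest).map (((fun c => c + pre.length) ∘ (fun c => c + 1)) ∘ (fun c => c + 1)) =
        (pvRocks rest).map (fun c => c + (pre ++ [".", "O"]).length) from
      List.map_congr_left (fun c _ => by simp [Function.comp]; omega)]
    rw [show pre ++ "." :: "O" :: rest = (pre ++ [".", "O"]) ++ rest from by simp,
      ih (pre ++ [".", "O"]) true]
    rw [show eScanM ("O" :: "." :: rest) = ("." :: "O" :: (eScanM rest).1, true) from by simp [eScanM]]
    simp
  | case4 x y rest h ih =>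
    intro pre m
    have hres : eScanM (x :: y :: rest) = (x :: (eScanM (y :: rest)).1, (eScanM (y :: rest)).2) := by
      rw [eScanM, if_neg h]
    have hmap : (pvRocks (y :: rest)).map ((fun c => c + pre.length) ∘ (fun c => c + 1)) =
        (pvRocks (y :: rest)).map (fun c => c + (pre ++ [x]).length) :=
      List.map_congr_left (fun c _ => by simp [Function.comp]; omega)
    by_cases hx : x = "O"
    · subst hx
      have hy : ¬ y = "." := fun hy => h ⟨rfl, hy⟩
      rw [pvRocks_cons_O, List.map_cons, List.map_map, List.foldl_cons, Nat.zero_add]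
      rw [show eOp (pre ++ "O" :: y :: rest, m) pre.length = (pre ++ "O" :: y :: rest, m) from by
        rw [eOp, if_neg (by
          rintro ⟨-, h2⟩
          rw [show ((pre.length : Nat) : Int) + 1 = ((pre.length + 1 : Nat) : Int) from by push_cast; ring,
            PySem.List.pyGetD_natCast, getD_off] at h2
          exact hy (by simpa using h2))]]
      rw [hmap, show pre ++ "O" :: y :: rest = (pre ++ ["O"]) ++ y :: rest from by simp,
        ih (pre ++ ["O"]) m, hres]
      simp
    · rw [pvRocks_cons_ne x (y :: rest) hx, List.map_map]
      rw [hmap, show pre ++ x :: y :: rest = (pre ++ [x]) ++ y :: rest from by simp,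
        ih (pre ++ [x]) m, hres]
      simp

lemma rowW (row : List String) (m : Bool) :
    (pvRocks row).foldl wOp (row, m) = ((scanM row).1, m || (scanM row).2) := by
  cases row with
  | nil => simp [pvRocks, scanM]
  | cons x xs =>
    rw [pvRocks_cons, List.foldl_append]
    have h0 : ∀ (l : List String) (b : Bool), wOp (l, b) 0 = (l, b) := by
      intro l b; rw [wOp, if_neg (fun hh => by omega)]
    have hfirst : (if x = "O" then [0] else []).foldl wOp (x :: xs, m) = (x :: xs, m) := by
      split <;> simp [h0]
    rw [hfirst]
    have := wG xs [] x m
    simpa using this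

lemma rowE (row : List String) (m : Bool) :
    (pvRocks row).foldl eOp (row, m) = ((eScanM row).1, m || (eScanM row).2) := by
  have := eG row [] m
  simpa using this

lemma set_getD_self {α : Type} (g : List α) (r : Nat) (d : α) (h : r < g.length) :
    g.set r (g.getD r d) = g := by
  rw [List.getD_eq_getElem?_getD, List.getElem?_eq_getElem h]
  exact List.set_getElem_self h

lemma innerW (row : Nat) (cs : List Nat) :
    ∀ (g : List (List String)) (m : Bool), row < g.length →
    cs.foldl (fun s (rock : Nat) =>
        if pvGet s.1 (row : Int) ((rock : Int) - 1) = "." ∧ rock > 0 then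
          (pvSet (pvSet s.1 row (rock - 1) "O") row rock ".", true)
        else s) (g, m)
    = (g.set row (cs.foldl wOp (g.getD row [], m)).1, (cs.foldl wOp (g.getD row [], m)).2) := by
  induction cs with
  | nil =>
    intro g m h
    show (g, m) = (g.set row (g.getD row []), m)
    rw [set_getD_self g row [] h]
  | cons c cs ih =>
    intro g m h
    simp only [List.foldl_cons]
    have hget : pvGet g (row : Int) ((c : Int) - 1) =
        PySem.List.pyGetD (g.getD row []) ((c : Int) - 1) "" := by
      simp [pvGet, PySem.List.pyGetD_natCast]
    by_cases hc : PySem.List.pyGetD (g.getD row []) ((c : Int) - 1) "" = "." ∧ c > 0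
    · rw [if_pos (by rw [hget]; exact hc)]
      have hset : pvSet (pvSet g row (c - 1) "O") row c "." =
          g.set row (((g.getD row []).set (c - 1) "O").set c ".") := by
        simp only [pvSet]
        rw [getD_set_self g row _ _ h, List.set_set]
      rw [hset, wOp, if_pos hc]
      rw [ih (g.set row (((g.getD row []).set (c - 1) "O").set c ".")) true (by simpa using h)]
      rw [getD_set_self g row _ _ h, List.set_set]
    · rw [if_neg (by rw [hget]; exact hc), wOp, if_neg hc]
      exact ih g m h

lemma innerE (row : Nat) (cs : List Nat) :
    ∀ (g : List (List String)) (m : Bool), row < g.length →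
    cs.foldl (fun s (rock : Nat) =>
        if (rock : Int) < PySem.List.len (s.1.getD row []) - 1 ∧
            pvGet s.1 (row : Int) ((rock : Int) + 1) = "." then
          (pvSet (pvSet s.1 row (rock + 1) "O") row rock ".", true)
        else s) (g, m)
    = (g.set row (cs.foldl eOp (g.getD row [], m)).1, (cs.foldl eOp (g.getD row [], m)).2) := by
  induction cs with
  | nil =>
    intro g m h
    show (g, m) = (g.set row (g.getD row []), m)
    rw [set_getD_self g row [] h]
  | cons c cs ih =>
    intro g m h
    simp only [List.foldl_cons]
    have hget : pvGet g (row : Int) ((c : Int) + 1) =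
        PySem.List.pyGetD (g.getD row []) ((c : Int) + 1) "" := by
      simp [pvGet, PySem.List.pyGetD_natCast]
    by_cases hc : (c : Int) < PySem.List.len (g.getD row []) - 1 ∧
        PySem.List.pyGetD (g.getD row []) ((c : Int) + 1) "" = "."
    · rw [if_pos (by rw [hget]; exact hc)]
      have hset : pvSet (pvSet g row (c + 1) "O") row c "." =
          g.set row (((g.getD row []).set (c + 1) "O").set c ".") := by
        simp only [pvSet]
        rw [getD_set_self g row _ _ h, List.set_set]
      rw [hset, eOp, if_pos hc]
      rw [ih (g.set row (((g.getD row []).set (c + 1) "O").set c ".")) true (by simpa using h)]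
      rw [getD_set_self g row _ _ h, List.set_set]
    · rw [if_neg (by rw [hget]; exact hc), eOp, if_neg hc]
      exact ih g m h

lemma foldRows (f : List String → List String) (b : List String → Bool)
    (step : List (List String) × Bool → Nat → List (List String) × Bool)
    (hstep : ∀ g m row, row < g.length →
      step (g, m) row = (g.set row (f (g.getD row [])), m || b (g.getD row []))) :
    ∀ (rows pre : List (List String)) (m : Bool),
      ((List.range rows.length).map (fun i => pre.length + i)).foldl step (pre ++ rows, m) =
        (pre ++ rows.map f, m || rows.any b) := by
  intro rows
  induction rows with
  | nil => intro pre m; simp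
  | cons r rest ih =>
    intro pre m
    rw [List.length_cons, List.range_succ_eq_map, List.map_cons, List.map_map, List.foldl_cons]
    rw [hstep (pre ++ r :: rest) m (pre.length + 0) (by simp)]
    rw [getD_off, set_off]
    simp only [List.getD_cons_zero, List.set_cons_zero]
    rw [show (pre ++ f r :: rest) = (pre ++ [f r]) ++ rest from by simp]
    rw [show (List.range rest.length).map ((fun i => pre.length + i) ∘ Nat.succ) =
        (List.range rest.length).map (fun i => (pre ++ [f r]).length + i) from
      List.map_congr_left (fun c _ => by simp [Function.comp]; omega)]
    rw [ih (pre ++ [f r]) (m || b r)]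
    simp [Bool.or_assoc]

lemma sweepW_eq (t : List (List String)) :
    pvSweepW t = (t.map (fun r => (scanM r).1), t.any (fun r => (scanM r).2)) := by
  unfold pvSweepW
  have hstep : ∀ g m row, row < g.length →
      (fun (s : List (List String) × Bool) (row : Nat) =>
        (pvRocks (s.1.getD row [])).foldl (fun s (rock : Nat) =>
          if pvGet s.1 (row : Int) ((rock : Int) - 1) = "." ∧ rock > 0 then
            (pvSet (pvSet s.1 row (rock - 1) "O") row rock ".", true)
          else s) s) (g, m) row =
      (g.set row ((scanM (g.getD row [])).1), m || (scanM (g.getD row [])).2) := by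
    intro g m row h
    show (pvRocks (g.getD row [])).foldl _ (g, m) = _
    rw [innerW row (pvRocks (g.getD row [])) g m h, rowW]
  have hmain := foldRows (fun r => (scanM r).1) (fun r => (scanM r).2)
      (fun (s : List (List String) × Bool) (row : Nat) =>
        (pvRocks (s.1.getD row [])).foldl (fun s (rock : Nat) =>
          if pvGet s.1 (row : Int) ((rock : Int) - 1) = "." ∧ rock > 0 then
            (pvSet (pvSet s.1 row (rock - 1) "O") row rock ".", true)
          else s) s) hstep t [] false
  simpa using hmain

lemma sweepE_eq (t : List (List String)) :
    pvSweepE t = (t.map (fun r => (eScanM r).1), t.any (fun r => (eScanM r).2)) := by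
  unfold pvSweepE
  have hstep : ∀ g m row, row < g.length →
      (fun (s : List (List String) × Bool) (row : Nat) =>
        (pvRocks (s.1.getD row [])).foldl (fun s (rock : Nat) =>
          if (rock : Int) < PySem.List.len (s.1.getD row []) - 1 ∧
              pvGet s.1 (row : Int) ((rock : Int) + 1) = "." then
            (pvSet (pvSet s.1 row (rock + 1) "O") row rock ".", true)
          else s) s) (g, m) row =
      (g.set row ((eScanM (g.getD row [])).1), m || (eScanM (g.getD row [])).2) := by
    intro g m row h
    show (pvRocks (g.getD row [])).foldl _ (g, m) = _
    rw [innerE row (pvRocks (g.getD row [])) g m h, rowE]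
  have hmain := foldRows (fun r => (eScanM r).1) (fun r => (eScanM r).2)
      (fun (s : List (List String) × Bool) (row : Nat) =>
        (pvRocks (s.1.getD row [])).foldl (fun s (rock : Nat) =>
          if (rock : Int) < PySem.List.len (s.1.getD row []) - 1 ∧
              pvGet s.1 (row : Int) ((rock : Int) + 1) = "." then
            (pvSet (pvSet s.1 row (rock + 1) "O") row rock ".", true)
          else s) s) hstep t [] false
  simpa using hmain


-- ---------- North / South: one sweep = a structural scan over rows of pairwise moves ----------

-- simultaneous move of every rock of row b whose target cell in row a is free
def comb (a b : List String) : (List String × List String) × Bool :=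
  (((List.range a.length).map fun c => if b.getD c "" = "O" ∧ a.getD c "" = "." then "O" else a.getD c "",
    (List.range b.length).map fun c => if b.getD c "" = "O" ∧ a.getD c "" = "." then "." else b.getD c ""),
   decide (∃ c, c < b.length ∧ b.getD c "" = "O" ∧ a.getD c "" = "."))

-- one North sweep, rows processed top-down, a row pair at a time (cascading)
def nScanG : List (List String) → List (List String) × Bool
  | [] => ([], false)
  | [x] => ([x], false)
  | x :: y :: rest =>
    ((comb x y).1.1 :: (nScanG ((comb x y).1.2 :: rest)).1,
     (comb x y).2 || (nScanG ((comb x y).1.2 :: rest)).2)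
termination_by l => l.length

-- one South sweep, rows processed bottom-up (cascading); pair roles mirrored
def sScanG : List (List String) → List (List String) × Bool
  | [] => ([], false)
  | x :: xs =>
    match sScanG xs with
    | (y :: rest, f) => ((comb y x).1.2 :: (comb y x).1.1 :: rest, (comb y x).2 || f)
    | ([], f) => ([x], f)

lemma comb_fst_length (a b : List String) : (comb a b).1.1.length = a.length := by simp [comb]

lemma comb_snd_length (a b : List String) : (comb a b).1.2.length = b.length := by simp [comb]

lemma length_nScanG (t : List (List String)) : (nScanG t).1.length = t.length := by
  induction t using nScanG.induct with
  | case1 => simp [nScanG]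
  | case2 => simp [nScanG]
  | case3 x y rest ih => simp [nScanG, ih]

lemma length_sScanG (t : List (List String)) : (sScanG t).1.length = t.length := by
  induction t with
  | nil => simp [sScanG]
  | cons x xs ih =>
    rcases hs : sScanG xs with ⟨s1, f⟩
    rw [hs] at ih
    rcases s1 with _ | ⟨y, rest⟩
    · rw [show sScanG (x :: xs) = ([x], f) by rw [sScanG, hs]]
      simp [← ih]
    · rw [show sScanG (x :: xs) = ((comb y x).1.2 :: (comb y x).1.1 :: rest, (comb y x).2 || f) by
        rw [sScanG, hs]]
      simp at ih ⊢
      omega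

-- rocks of a row: membership and distinctness
lemma mem_pvRocks (l : List String) (c : Nat) :
    c ∈ pvRocks l ↔ c < l.length ∧ l.getD c "" = "O" := by
  simp [pvRocks, List.mem_filter, List.mem_range]

lemma nodup_pvRocks (l : List String) : (pvRocks l).Nodup :=
  (List.nodup_range).filter _

lemma getD_set_ne {α : Type} (g : List α) (r' r : Nat) (x d : α) (h : r' ≠ r) :
    (g.set r' x).getD r d = g.getD r d := by
  simp [List.getD_eq_getElem?_getD, List.getElem?_set_ne h]

-- the per-column pair move of A's North/South inner loop (a = target row, b = rock row)
def pOp (s : (List String × List String) × Bool) (c : Nat) : (List String × List String) × Bool :=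
  if PySem.List.pyGetD s.1.1 (c : Int) "" = "." then ((s.1.1.set c "O", s.1.2.set c "."), true) else s

lemma getD_range_map_self {α : Type} (a : List α) (d : α) :
    (List.range a.length).map (fun c => a.getD c d) = a := by
  apply List.ext_getElem (by simp)
  intro i h1 h2
  simp [List.getD_eq_getElem?_getD, List.getElem?_eq_getElem h2]

lemma pFold_upd : ∀ (cs : List Nat) (a b : List String) (m : Bool), cs.Nodup →
    (∀ c ∈ cs, c < a.length ∧ c < b.length) →
    cs.foldl pOp ((a, b), m) =
      (((List.range a.length).map fun c => if c ∈ cs ∧ a.getD c "" = "." then "O" else a.getD c "",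
        (List.range b.length).map fun c => if c ∈ cs ∧ a.getD c "" = "." then "." else b.getD c ""),
       m || decide (∃ c ∈ cs, a.getD c "" = ".")) := by
  intro cs
  induction cs with
  | nil =>
    intro a b m _ _
    simp only [List.foldl_nil, List.not_mem_nil, false_and, if_false]
    rw [getD_range_map_self, getD_range_map_self]
    simp
  | cons c0 cs ih =>
    intro a b m hnd hlt
    have hnd' := (List.nodup_cons.1 hnd).2
    have hc0 : c0 ∉ cs := (List.nodup_cons.1 hnd).1
    have hlt' := fun c hc => hlt c (List.mem_cons_of_mem _ hc)
    have hc0a : c0 < a.length := (hlt c0 List.mem_cons_self).1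
    have hc0b : c0 < b.length := (hlt c0 List.mem_cons_self).2
    simp only [List.foldl_cons]
    by_cases ha : a.getD c0 "" = "."
    · rw [show pOp ((a, b), m) c0 = ((a.set c0 "O", b.set c0 "."), true) from by
        rw [pOp, if_pos (by rw [PySem.List.pyGetD_natCast]; exact ha)]]
      rw [ih (a.set c0 "O") (b.set c0 ".") true hnd' (fun c hc => by
        have := hlt' c hc; simp [this])]
      have hgoal1 : ((List.range (a.set c0 "O").length).map fun c =>
          if c ∈ cs ∧ (a.set c0 "O").getD c "" = "." then "O" else (a.set c0 "O").getD c "") =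
          ((List.range a.length).map fun c =>
          if c ∈ c0 :: cs ∧ a.getD c "" = "." then "O" else a.getD c "") := by
        rw [List.length_set]
        apply List.map_congr_left
        intro c _
        by_cases hcc : c = c0
        · subst hcc
          rw [getD_set_self a c "O" "" hc0a, if_neg (fun hh => hc0 hh.1),
            if_pos ⟨List.mem_cons_self, ha⟩]
        · rw [getD_set_ne a c0 c "O" "" (fun hh => hcc hh.symm)]
          exact if_congr (by simp [List.mem_cons, hcc]) rfl rfl
      have hgoal2 : ((List.range (b.set c0 ".").length).map fun c =>
          if c ∈ cs ∧ (a.set c0 "O").getD c "" = "." then "." else (b.set c0 ".").getD c "") =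
          ((List.range b.length).map fun c =>
          if c ∈ c0 :: cs ∧ a.getD c "" = "." then "." else b.getD c "") := by
        rw [List.length_set]
        apply List.map_congr_left
        intro c _
        by_cases hcc : c = c0
        · subst hcc
          rw [if_neg (fun hh => hc0 hh.1), getD_set_self b c "." "" hc0b,
            if_pos ⟨List.mem_cons_self, ha⟩]
        · rw [getD_set_ne a c0 c "O" "" (fun hh => hcc hh.symm),
            getD_set_ne b c0 c "." "" (fun hh => hcc hh.symm)]
          exact if_congr (by simp [List.mem_cons, hcc]) rfl rfl
      rw [hgoal1, hgoal2]
      have hl : (true || decide (∃ c ∈ cs, (a.set c0 "O").getD c "" = ".")) = true := by simp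
      have hr : (m || decide (∃ c ∈ c0 :: cs, a.getD c "" = ".")) = true := by
        have hw : ∃ c ∈ c0 :: cs, a.getD c "" = "." := ⟨c0, List.mem_cons_self, ha⟩
        simp only [hw, decide_true, Bool.or_true]
      rw [hl, hr]
    · rw [show pOp ((a, b), m) c0 = ((a, b), m) from by
        rw [pOp, if_neg (by rw [PySem.List.pyGetD_natCast]; exact ha)]]
      rw [ih a b m hnd' hlt']
      have e1 : ((List.range a.length).map fun c =>
          if c ∈ cs ∧ a.getD c "" = "." then "O" else a.getD c "") =
          ((List.range a.length).map fun c =>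
          if c ∈ c0 :: cs ∧ a.getD c "" = "." then "O" else a.getD c "") := by
        apply List.map_congr_left
        intro c _
        by_cases hcc : c = c0
        · subst hcc
          rw [if_neg (fun hh => hc0 hh.1), if_neg (fun hh => ha hh.2)]
        · exact if_congr (by simp [List.mem_cons, hcc]) rfl rfl
      have e2 : ((List.range b.length).map fun c =>
          if c ∈ cs ∧ a.getD c "" = "." then "." else b.getD c "") =
          ((List.range b.length).map fun c =>
          if c ∈ c0 :: cs ∧ a.getD c "" = "." then "." else b.getD c "") := by
        apply List.map_congr_left
        intro c _
        by_cases hcc : c = c0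
        · subst hcc
          rw [if_neg (fun hh => hc0 hh.1), if_neg (fun hh => ha hh.2)]
        · exact if_congr (by simp [List.mem_cons, hcc]) rfl rfl
      have eflag : decide (∃ c ∈ cs, a.getD c "" = ".") =
          decide (∃ c ∈ c0 :: cs, a.getD c "" = ".") := by
        rw [decide_eq_decide]
        constructor
        · rintro ⟨c, h1, h2⟩; exact ⟨c, List.mem_cons_of_mem _ h1, h2⟩
        · rintro ⟨c, h1, h2⟩
          rcases List.mem_cons.1 h1 with hh | hh
          · subst hh; exact absurd h2 ha
          · exact ⟨c, hh, h2⟩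
      rw [e1, e2, eflag]

lemma pFold_comb (a b : List String) (m : Bool) (hab : a.length = b.length) :
    (pvRocks b).foldl pOp ((a, b), m) = ((comb a b).1, m || (comb a b).2) := by
  rw [pFold_upd (pvRocks b) a b m (nodup_pvRocks b)
    (fun c hc => by
      have := (mem_pvRocks b c).1 hc
      omega)]
  simp only [comb]
  congr 1
  · congr 1
    · apply List.map_congr_left
      intro c hc
      rw [List.mem_range] at hc
      by_cases hO : b.getD c "" = "O"
      · have hmem : c ∈ pvRocks b := (mem_pvRocks b c).2 ⟨by omega, hO⟩
        rw [List.getD_eq_getElem?_getD] at hO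
        simp [hmem, hO]
      · have hmem : c ∉ pvRocks b := fun hin => hO ((mem_pvRocks b c).1 hin).2
        rw [List.getD_eq_getElem?_getD] at hO
        simp [hmem, hO]
    · apply List.map_congr_left
      intro c hc
      rw [List.mem_range] at hc
      by_cases hO : b.getD c "" = "O"
      · have hmem : c ∈ pvRocks b := (mem_pvRocks b c).2 ⟨by omega, hO⟩
        rw [List.getD_eq_getElem?_getD] at hO
        simp [hmem, hO]
      · have hmem : c ∉ pvRocks b := fun hin => hO ((mem_pvRocks b c).1 hin).2
        rw [List.getD_eq_getElem?_getD] at hO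
        simp [hmem, hO]
  · congr 1
    rw [decide_eq_decide]
    constructor
    · rintro ⟨c, h1, h2⟩
      obtain ⟨hlt, hO⟩ := (mem_pvRocks b c).1 h1
      exact ⟨c, hlt, hO, h2⟩
    · rintro ⟨c, h1, h2, h3⟩
      exact ⟨c, (mem_pvRocks b c).2 ⟨h1, h2⟩, h3⟩


def RectW (w : Nat) (t : List (List String)) : Prop := ∀ r ∈ t, r.length = w

lemma innerN (row : Nat) (cs : List Nat) : ∀ (g : List (List String)) (m : Bool),
    1 ≤ row → row < g.length →
    cs.foldl (fun s (rock : Nat) =>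
      if pvGet s.1 ((row : Int) - 1) (rock : Int) = "." ∧ row > 0 then
        (pvSet (pvSet s.1 (row - 1) rock "O") row rock ".", true)
      else s) (g, m)
    = ((g.set (row - 1) (cs.foldl pOp ((g.getD (row - 1) [], g.getD row []), m)).1.1).set row
        (cs.foldl pOp ((g.getD (row - 1) [], g.getD row []), m)).1.2,
       (cs.foldl pOp ((g.getD (row - 1) [], g.getD row []), m)).2) := by
  have hcast : ∀ row : Nat, 1 ≤ row → (row : Int) - 1 = ((row - 1 : Nat) : Int) := by
    intro r h; omega
  induction cs with
  | nil =>
    intro g m h1 h2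
    show (g, m) = ((g.set (row - 1) (g.getD (row - 1) [])).set row (g.getD row []), m)
    rw [set_getD_self g (row - 1) [] (by omega)]
    rw [set_getD_self g row [] h2]
  | cons c cs ih =>
    intro g m h1 h2
    simp only [List.foldl_cons]
    have hget : pvGet g ((row : Int) - 1) (c : Int) =
        PySem.List.pyGetD (g.getD (row - 1) []) (c : Int) "" := by
      rw [pvGet, hcast row h1]
      simp [PySem.List.pyGetD_natCast]
    by_cases hc : PySem.List.pyGetD (g.getD (row - 1) []) (c : Int) "" = "."
    · rw [if_pos ⟨by rw [hget]; exact hc, by omega⟩]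
      have hne : row - 1 ≠ row := by omega
      have hset : pvSet (pvSet g (row - 1) c "O") row c "." =
          (g.set (row - 1) ((g.getD (row - 1) []).set c "O")).set row
            ((g.getD row []).set c ".") := by
        simp only [pvSet]
        rw [getD_set_ne g (row - 1) row _ [] hne]
      rw [hset, show pOp ((g.getD (row - 1) [], g.getD row []), m) c =
          (((g.getD (row - 1) []).set c "O", (g.getD row []).set c "."), true) from by
        rw [pOp, if_pos hc]]
      set A := (g.getD (row - 1) []).set c "O" with hA
      set B := (g.getD row []).set c "." with hB
      have hlen1 : row < ((g.set (row - 1) A).set row B).length := by simpa using h2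
      rw [ih ((g.set (row - 1) A).set row B) true h1 hlen1]
      have hgA : ((g.set (row - 1) A).set row B).getD (row - 1) [] = A := by
        rw [getD_set_ne _ row (row - 1) _ [] (Ne.symm hne), getD_set_self g (row - 1) A [] (by omega)]
      have hgB : ((g.set (row - 1) A).set row B).getD row [] = B := by
        rw [getD_set_self _ row B [] (by simpa using h2)]
      rw [hgA, hgB]
      have hcollapse : ∀ (Q1 Q2 : List String),
          (((g.set (row - 1) A).set row B).set (row - 1) Q1).set row Q2 =
            (g.set (row - 1) Q1).set row Q2 := by
        intro Q1 Q2
        rw [List.set_comm _ _ (by omega : row ≠ row - 1)]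
        simp only [List.set_set]
      rw [hcollapse]
    · rw [if_neg (fun hh => hc (by rw [← hget]; exact hh.1))]
      rw [show pOp ((g.getD (row - 1) [], g.getD row []), m) c =
          ((g.getD (row - 1) [], g.getD row []), m) from by rw [pOp, if_neg hc]]
      exact ih g m h1 h2


lemma innerS (row : Nat) (cs : List Nat) : ∀ (g : List (List String)) (m : Bool),
    row + 1 < g.length →
    cs.foldl (fun s (rock : Nat) =>
      if (row : Int) < PySem.List.len s.1 - 1 ∧ pvGet s.1 ((row : Int) + 1) (rock : Int) = "." then
        (pvSet (pvSet s.1 (row + 1) rock "O") row rock ".", true)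
      else s) (g, m)
    = ((g.set (row + 1) (cs.foldl pOp ((g.getD (row + 1) [], g.getD row []), m)).1.1).set row
        (cs.foldl pOp ((g.getD (row + 1) [], g.getD row []), m)).1.2,
       (cs.foldl pOp ((g.getD (row + 1) [], g.getD row []), m)).2) := by
  induction cs with
  | nil =>
    intro g m h2
    show (g, m) = ((g.set (row + 1) (g.getD (row + 1) [])).set row (g.getD row []), m)
    rw [set_getD_self g (row + 1) [] h2, set_getD_self g row [] (by omega)]
  | cons c cs ih =>
    intro g m h2
    simp only [List.foldl_cons]
    have hguard : (row : Int) < PySem.List.len g - 1 := by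
      rw [PySem.List.len_eq]; omega
    have hget : pvGet g ((row : Int) + 1) (c : Int) =
        PySem.List.pyGetD (g.getD (row + 1) []) (c : Int) "" := by
      rw [pvGet, show ((row : Nat) : Int) + 1 = ((row + 1 : Nat) : Int) from by omega]
      simp only [PySem.List.pyGetD_natCast]
    by_cases hc : PySem.List.pyGetD (g.getD (row + 1) []) (c : Int) "" = "."
    · rw [if_pos ⟨hguard, by rw [hget]; exact hc⟩]
      have hne : row + 1 ≠ row := by omega
      have hset : pvSet (pvSet g (row + 1) c "O") row c "." =
          (g.set (row + 1) ((g.getD (row + 1) []).set c "O")).set row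
            ((g.getD row []).set c ".") := by
        simp only [pvSet]
        rw [getD_set_ne g (row + 1) row _ [] hne]
      rw [hset, show pOp ((g.getD (row + 1) [], g.getD row []), m) c =
          (((g.getD (row + 1) []).set c "O", (g.getD row []).set c "."), true) from by
        rw [pOp, if_pos hc]]
      set A := (g.getD (row + 1) []).set c "O" with hA
      set B := (g.getD row []).set c "." with hB
      have hlen1 : row + 1 < ((g.set (row + 1) A).set row B).length := by simpa using h2
      rw [ih ((g.set (row + 1) A).set row B) true hlen1]
      have hgA : ((g.set (row + 1) A).set row B).getD (row + 1) [] = A := by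
        rw [getD_set_ne _ row (row + 1) _ [] (Ne.symm hne), getD_set_self g (row + 1) A [] h2]
      have hgB : ((g.set (row + 1) A).set row B).getD row [] = B := by
        rw [getD_set_self _ row B [] (by simpa using (by omega : row < g.length))]
      rw [hgA, hgB]
      have hcollapse : ∀ (Q1 Q2 : List String),
          (((g.set (row + 1) A).set row B).set (row + 1) Q1).set row Q2 =
            (g.set (row + 1) Q1).set row Q2 := by
        intro Q1 Q2
        rw [List.set_comm _ _ (by omega : row ≠ row + 1)]
        simp only [List.set_set]
      rw [hcollapse]
    · rw [if_neg (fun hh => hc (by rw [← hget]; exact hh.2))]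
      rw [show pOp ((g.getD (row + 1) [], g.getD row []), m) c =
          ((g.getD (row + 1) [], g.getD row []), m) from by rw [pOp, if_neg hc]]
      exact ih g m h2

lemma foldl_noop {α β : Type} (cs : List β) (op : α → β → α) (s : α)
    (h : ∀ s' x, op s' x = s') : cs.foldl op s = s := by
  induction cs generalizing s with
  | nil => rfl
  | cons c cs ih => rw [List.foldl_cons, h s c]; exact ih s

lemma rectW_nScanG {w : Nat} : ∀ {t : List (List String)}, RectW w t → RectW w (nScanG t).1 := by
  intro t
  induction t using nScanG.induct with
  | case1 => intro h; simpa [nScanG] using h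
  | case2 x => intro h; simpa [nScanG] using h
  | case3 x y rest ih =>
    intro h
    rw [nScanG]
    intro r hr
    rcases List.mem_cons.1 hr with hh | hh
    · subst hh
      rw [comb_fst_length]
      exact h x List.mem_cons_self
    · refine ih ?_ r hh
      intro r' hr'
      rcases List.mem_cons.1 hr' with hh' | hh'
      · subst hh'
        rw [comb_snd_length]
        exact h y (List.mem_cons_of_mem _ List.mem_cons_self)
      · exact h r' (List.mem_cons_of_mem _ (List.mem_cons_of_mem _ hh'))

lemma rectW_sScanG {w : Nat} : ∀ {t : List (List String)}, RectW w t → RectW w (sScanG t).1 := by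
  intro t
  induction t with
  | nil => intro h; simpa [sScanG] using h
  | cons x xs ih =>
    intro h
    have hx : x.length = w := h x List.mem_cons_self
    have hxs : RectW w xs := fun r hr => h r (List.mem_cons_of_mem _ hr)
    rcases hs : sScanG xs with ⟨s1, f⟩
    have hrec : RectW w s1 := by
      have := ih hxs
      rwa [hs] at this
    rcases s1 with _ | ⟨y, rest⟩
    · rw [show sScanG (x :: xs) = ([x], f) by rw [sScanG, hs]]
      intro r hr
      rcases List.mem_cons.1 hr with hh | hh
      · subst hh; exact hx
      · simp at hh
    · rw [show sScanG (x :: xs) = ((comb y x).1.2 :: (comb y x).1.1 :: rest, (comb y x).2 || f) by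
        rw [sScanG, hs]]
      intro r hr
      rcases List.mem_cons.1 hr with hh | hh
      · subst hh; rw [comb_snd_length]; exact hx
      · rcases List.mem_cons.1 hh with hh' | hh'
        · subst hh'; rw [comb_fst_length]; exact hrec y List.mem_cons_self
        · exact hrec r (List.mem_cons_of_mem _ hh')

lemma gN (xs : List (List String)) : ∀ (pre : List (List String)) (x : List String) (m : Bool)
    (w : Nat), RectW w (pre ++ x :: xs) →
    ((List.range xs.length).map (fun i => i + (pre.length + 1))).foldl
      (fun s (row : Nat) => (pvRocks (s.1.getD row [])).foldl (fun s (rock : Nat) =>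
        if pvGet s.1 ((row : Int) - 1) (rock : Int) = "." ∧ row > 0 then
          (pvSet (pvSet s.1 (row - 1) rock "O") row rock ".", true)
        else s) s) (pre ++ x :: xs, m)
    = (pre ++ (nScanG (x :: xs)).1, m || (nScanG (x :: xs)).2) := by
  induction xs with
  | nil => intro pre x m w _; simp [nScanG]
  | cons y rest ih =>
    intro pre x m w hrect
    have hxw : x.length = w := hrect x (by simp)
    have hyw : y.length = w := hrect y (by simp)
    rw [List.length_cons, List.range_succ_eq_map, List.map_cons, List.map_map, List.foldl_cons]
    simp only [Nat.zero_add]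
    have hrow : pre.length + 1 - 1 = pre.length := by omega
    have hg1 : (pre ++ x :: y :: rest).getD pre.length [] = x := by
      rw [← Nat.add_zero pre.length, getD_off]; rfl
    have hg2 : (pre ++ x :: y :: rest).getD (pre.length + 1) [] = y := by
      rw [getD_off]; rfl
    have e1 : (pre ++ x :: y :: rest).set pre.length (comb x y).1.1 =
        pre ++ (comb x y).1.1 :: y :: rest := by
      rw [← Nat.add_zero pre.length, set_off, List.set_cons_zero]
    have e2 : (pre ++ (comb x y).1.1 :: y :: rest).set (pre.length + 1) (comb x y).1.2 =
        pre ++ (comb x y).1.1 :: (comb x y).1.2 :: rest := by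
      rw [set_off]; rfl
    have hstep1 : (pvRocks ((pre ++ x :: y :: rest).getD (pre.length + 1) [])).foldl
        (fun s (rock : Nat) =>
          if pvGet s.1 (((pre.length + 1 : Nat) : Int) - 1) (rock : Int) = "." ∧ pre.length + 1 > 0 then
            (pvSet (pvSet s.1 (pre.length + 1 - 1) rock "O") (pre.length + 1) rock ".", true)
          else s) (pre ++ x :: y :: rest, m)
        = (pre ++ (comb x y).1.1 :: (comb x y).1.2 :: rest, m || (comb x y).2) := by
      rw [hg2, innerN (pre.length + 1) (pvRocks y) (pre ++ x :: y :: rest) m (by omega)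
        (by simp)]
      rw [hrow, hg1, hg2, pFold_comb x y m (by rw [hxw, hyw])]
      simp only [e1, e2]
    rw [hstep1]
    rw [show (List.range rest.length).map ((fun i => i + (pre.length + 1)) ∘ Nat.succ) =
        (List.range rest.length).map (fun i => i + ((pre ++ [(comb x y).1.1]).length + 1)) from
      List.map_congr_left (fun i _ => by simp [Function.comp]; omega)]
    rw [show pre ++ (comb x y).1.1 :: (comb x y).1.2 :: rest =
        (pre ++ [(comb x y).1.1]) ++ (comb x y).1.2 :: rest from by simp]
    rw [ih (pre ++ [(comb x y).1.1]) (comb x y).1.2 (m || (comb x y).2) w (by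
      intro r hr
      simp only [List.append_assoc, List.cons_append, List.nil_append, List.mem_append,
        List.mem_cons] at hr
      rcases hr with hh | hh | hh | hh
      · exact hrect r (List.mem_append_left _ hh)
      · subst hh; rw [comb_fst_length]; exact hxw
      · subst hh; rw [comb_snd_length]; exact hyw
      · exact hrect r (by simp [hh]))]
    rw [show nScanG (x :: y :: rest) =
        ((comb x y).1.1 :: (nScanG ((comb x y).1.2 :: rest)).1,
         (comb x y).2 || (nScanG ((comb x y).1.2 :: rest)).2) from by rw [nScanG]]
    simp [Bool.or_assoc]

lemma sweepN_eq (t : List (List String)) (w : Nat) (hrect : RectW w t) :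
    pvSweepN t = ((nScanG t).1, (nScanG t).2) := by
  unfold pvSweepN
  cases t with
  | nil => simp [nScanG]
  | cons x xs =>
    rw [List.length_cons, List.range_succ_eq_map, List.foldl_cons]
    have hz : (pvRocks (((x :: xs, false) : List (List String) × Bool).1.getD 0 [])).foldl
        (fun s (rock : Nat) =>
          if pvGet s.1 (((0 : Nat) : Int) - 1) (rock : Int) = "." ∧ (0 : Nat) > 0 then
            (pvSet (pvSet s.1 (0 - 1) rock "O") 0 rock ".", true)
          else s) (x :: xs, false) = (x :: xs, false) := by
      apply foldl_noop
      intro s' c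
      rw [if_neg (fun hh => by omega)]
    rw [hz]
    have hmain := gN xs [] x false w (by simpa using hrect)
    rw [show (List.range xs.length).map Nat.succ =
        (List.range xs.length).map (fun i => i + (([] : List (List String)).length + 1)) from
      List.map_congr_left (fun i _ => by simp)]
    simpa using hmain


lemma innerS_noop (row : Nat) (cs : List Nat) (g : List (List String)) (m : Bool)
    (h : g.length ≤ row + 1) :
    cs.foldl (fun s (rock : Nat) =>
      if (row : Int) < PySem.List.len s.1 - 1 ∧ pvGet s.1 ((row : Int) + 1) (rock : Int) = "." then
        (pvSet (pvSet s.1 (row + 1) rock "O") row rock ".", true)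
      else s) (g, m) = (g, m) := by
  induction cs with
  | nil => rfl
  | cons c cs ih =>
    rw [List.foldl_cons, if_neg (fun hh => by
      have h1 : (row : Int) < PySem.List.len g - 1 := hh.1
      rw [PySem.List.len_eq] at h1
      omega)]
    exact ih

lemma gS (l : List (List String)) : ∀ (pre : List (List String)) (m : Bool) (w : Nat),
    RectW w (pre ++ l) →
    (((List.range l.length).map (fun i => i + pre.length)).reverse).foldl
      (fun s (row : Nat) => (pvRocks (s.1.getD row [])).foldl (fun s (rock : Nat) =>
        if (row : Int) < PySem.List.len s.1 - 1 ∧ pvGet s.1 ((row : Int) + 1) (rock : Int) = "." then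
          (pvSet (pvSet s.1 (row + 1) rock "O") row rock ".", true)
        else s) s) (pre ++ l, m)
    = (pre ++ (sScanG l).1, m || (sScanG l).2) := by
  induction l with
  | nil => intro pre m w _; simp [sScanG]
  | cons x xs ih =>
    intro pre m w hrect
    have hxw : x.length = w := hrect x (by simp)
    rw [List.length_cons, List.range_succ_eq_map, List.map_cons, List.map_map, List.reverse_cons,
      List.foldl_append]
    simp only [Nat.zero_add]
    rw [show (List.range xs.length).map ((fun i => i + pre.length) ∘ Nat.succ) =
        (List.range xs.length).map (fun i => i + (pre ++ [x]).length) from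
      List.map_congr_left (fun i _ => by simp [Function.comp]; omega)]
    rw [show pre ++ x :: xs = (pre ++ [x]) ++ xs from by simp]
    rw [ih (pre ++ [x]) m w (by simpa using hrect)]
    rw [List.foldl_cons, List.foldl_nil]
    rcases hs : sScanG xs with ⟨s1, f⟩
    rcases s1 with _ | ⟨y, rest⟩
    · dsimp only
      have hxs : xs = [] := by
        have := length_sScanG xs
        rw [hs] at this
        simpa using this.symm
      subst hxs
      have hf : f = false := by
        have hnil : sScanG ([] : List (List String)) = ([], false) := rfl
        rw [hnil] at hs
        injection hs with h1 h2
        exact h2.symm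
      subst hf
      rw [innerS_noop pre.length _ _ _ (by simp)]
      rw [show sScanG [x] = ([x], false) from rfl]
      simp
    · dsimp only
      have hrecrect : RectW w (y :: rest) := by
        have h1 := rectW_sScanG (w := w) (t := xs) (fun r hr => hrect r (by simp [hr]))
        rwa [hs] at h1
      have hyw : y.length = w := hrecrect y List.mem_cons_self
      have hstate : (pre ++ [x]) ++ y :: rest = pre ++ x :: y :: rest := by simp
      rw [show pre ++ [x] ++ y :: rest = pre ++ x :: y :: rest from by simp]
      have hg0 : (pre ++ x :: y :: rest).getD pre.length [] = x := by
        rw [← Nat.add_zero pre.length, getD_off]; rfl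
      have hg1 : (pre ++ x :: y :: rest).getD (pre.length + 1) [] = y := by
        rw [getD_off]; rfl
      rw [hg0, innerS pre.length (pvRocks x) (pre ++ x :: y :: rest) (m || f) (by simp)]
      rw [hg0, hg1, pFold_comb y x (m || f) (by rw [hxw, hyw])]
      have e1 : (pre ++ x :: y :: rest).set (pre.length + 1) (comb y x).1.1 =
          pre ++ x :: (comb y x).1.1 :: rest := by
        rw [set_off]; rfl
      have e2 : (pre ++ x :: (comb y x).1.1 :: rest).set pre.length (comb y x).1.2 =
          pre ++ (comb y x).1.2 :: (comb y x).1.1 :: rest := by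
        rw [← Nat.add_zero pre.length, set_off, List.set_cons_zero]
      simp only [e1, e2]
      rw [show sScanG (x :: xs) = ((comb y x).1.2 :: (comb y x).1.1 :: rest, (comb y x).2 || f) from by
        rw [sScanG, hs]]
      cases m <;> cases f <;> cases (comb y x).2 <;> simp

lemma sweepS_eq (t : List (List String)) (w : Nat) (hrect : RectW w t) :
    pvSweepS t = ((sScanG t).1, (sScanG t).2) := by
  unfold pvSweepS
  have hmain := gS t [] false w (by simpa using hrect)
  rw [show (List.range t.length) = (List.range t.length).map (fun i => i + (([] : List (List String)).length)) from by simp]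
  simpa using hmain


-- ---------- columns of the row-pair scans are exactly the 1D scans ----------

lemma scanM_pair (p q : String) (r : List String) :
    scanM (p :: q :: r) =
      ((if q = "O" ∧ p = "." then "O" else p) ::
        (scanM ((if q = "O" ∧ p = "." then "." else q) :: r)).1,
       decide (q = "O" ∧ p = ".") || (scanM ((if q = "O" ∧ p = "." then "." else q) :: r)).2) := by
  by_cases h : q = "O" ∧ p = "."
  · obtain ⟨h1, h2⟩ := h
    subst h1; subst h2
    rw [show scanM ("." :: "O" :: r) = ("O" :: (scanM ("." :: r)).1, true) from by simp [scanM]]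
    simp
  · rw [scanM, if_neg (fun hh => h ⟨hh.2, hh.1⟩)]
    simp [h]

lemma sscanM_cons_eq {xs : List String} {y : String} {rest : List String} {f : Bool} (x : String)
    (hs : sscanM xs = (y :: rest, f)) :
    sscanM (x :: xs) =
      ((if x = "O" ∧ y = "." then "." else x) :: (if x = "O" ∧ y = "." then "O" else y) :: rest,
       decide (x = "O" ∧ y = ".") || f) := by
  rw [sscanM, hs]
  by_cases h : x = "O" ∧ y = "."
  · simp [h]
  · simp [h]

lemma colAt_cons (x : List String) (xs : List (List String)) (c : Nat) :
    colAt (x :: xs) c = x.getD c "" :: colAt xs c := rfl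

lemma comb_fst_getD (x y : List String) (c : Nat) (hc : c < x.length) :
    (comb x y).1.1.getD c "" =
      if y.getD c "" = "O" ∧ x.getD c "" = "." then "O" else x.getD c "" := by
  simp only [comb]
  rw [PySem.List.getD_map_range _ _ _ _ hc]

lemma comb_snd_getD (x y : List String) (c : Nat) (hc : c < y.length) :
    (comb x y).1.2.getD c "" =
      if y.getD c "" = "O" ∧ x.getD c "" = "." then "." else y.getD c "" := by
  simp only [comb]
  rw [PySem.List.getD_map_range _ _ _ _ hc]

lemma any_congr {α : Type} (l : List α) (p q : α → Bool) (h : ∀ x ∈ l, p x = q x) :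
    l.any p = l.any q := by
  induction l with
  | nil => rfl
  | cons a l ih =>
    simp only [List.any_cons]
    rw [h a List.mem_cons_self, ih (fun x hx => h x (List.mem_cons_of_mem _ hx))]

lemma any_or_distrib {α : Type} (l : List α) (p q : α → Bool) :
    l.any (fun x => p x || q x) = (l.any p || l.any q) := by
  induction l with
  | nil => rfl
  | cons a l ih =>
    rw [List.any_cons, List.any_cons, List.any_cons, ih]
    cases p a <;> cases q a <;> cases l.any p <;> cases l.any q <;> rfl

lemma decide_exists_lt_eq_any (n : Nat) (P : Nat → Prop) [DecidablePred P] :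
    decide (∃ c, c < n ∧ P c) = (List.range n).any (fun c => decide (P c)) := by
  by_cases hex : ∃ c, c < n ∧ P c
  · obtain ⟨c, h1, h2⟩ := hex
    have h3 : (List.range n).any (fun c => decide (P c)) = true :=
      List.any_eq_true.2 ⟨c, List.mem_range.2 h1, by simpa using h2⟩
    rw [h3, decide_eq_true ⟨c, h1, h2⟩]
  · have h3 : (List.range n).any (fun c => decide (P c)) = false := by
      rw [List.any_eq_false]
      intro c hcmem
      simp only [decide_eq_true_eq]
      exact fun hp => hex ⟨c, List.mem_range.1 hcmem, hp⟩
    rw [h3, decide_eq_false hex]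

lemma comb_flag_any (x y : List String) (w : Nat) (hx : x.length = w) (hy : y.length = w) :
    (comb x y).2 = (List.range w).any
      (fun c => decide (y.getD c "" = "O" ∧ x.getD c "" = ".")) := by
  simp only [comb]
  rw [hy] at *
  rw [show (decide (∃ c, c < w ∧ y.getD c "" = "O" ∧ x.getD c "" = ".")) =
      (List.range w).any (fun c => decide (y.getD c "" = "O" ∧ x.getD c "" = ".")) from
    decide_exists_lt_eq_any w _]

lemma colN (t : List (List String)) (w : Nat) (hrect : RectW w t) (c : Nat) (hc : c < w) :
    colAt (nScanG t).1 c = (scanM (colAt t c)).1 := by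
  induction t using nScanG.induct with
  | case1 => simp [nScanG, colAt, scanM]
  | case2 x => simp [nScanG, colAt, scanM]
  | case3 x y rest ih =>
    have hxw : x.length = w := hrect x (by simp)
    have hyw : y.length = w := hrect y (by simp)
    have hrect' : RectW w ((comb x y).1.2 :: rest) := by
      intro r hr
      rcases List.mem_cons.1 hr with hh | hh
      · subst hh; rw [comb_snd_length]; exact hyw
      · exact hrect r (by simp [hh])
    rw [show nScanG (x :: y :: rest) =
        ((comb x y).1.1 :: (nScanG ((comb x y).1.2 :: rest)).1,
         (comb x y).2 || (nScanG ((comb x y).1.2 :: rest)).2) from by rw [nScanG]]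
    rw [colAt_cons, ih hrect']
    simp only [colAt_cons]
    rw [scanM_pair, comb_fst_getD x y c (by omega), comb_snd_getD x y c (by omega)]

lemma flagN (t : List (List String)) (w : Nat) (hrect : RectW w t) :
    (nScanG t).2 = (List.range w).any (fun c => (scanM (colAt t c)).2) := by
  induction t using nScanG.induct with
  | case1 => simp [nScanG, colAt, scanM]
  | case2 x => simp [nScanG, colAt, scanM]
  | case3 x y rest ih =>
    have hxw : x.length = w := hrect x (by simp)
    have hyw : y.length = w := hrect y (by simp)
    have hrect' : RectW w ((comb x y).1.2 :: rest) := by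
      intro r hr
      rcases List.mem_cons.1 hr with hh | hh
      · subst hh; rw [comb_snd_length]; exact hyw
      · exact hrect r (by simp [hh])
    rw [show nScanG (x :: y :: rest) =
        ((comb x y).1.1 :: (nScanG ((comb x y).1.2 :: rest)).1,
         (comb x y).2 || (nScanG ((comb x y).1.2 :: rest)).2) from by rw [nScanG]]
    dsimp only
    rw [ih hrect', comb_flag_any x y w hxw hyw]
    have hsplit := any_or_distrib (List.range w)
      (fun c => decide (y.getD c "" = "O" ∧ x.getD c "" = "."))
      (fun c => (scanM (colAt ((comb x y).1.2 :: rest) c)).2)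
    rw [← hsplit]
    apply any_congr
    intro c hcm
    have hc : c < w := List.mem_range.1 hcm
    simp only [colAt_cons]
    rw [scanM_pair, comb_snd_getD x y c (by omega)]

lemma colS (t : List (List String)) (w : Nat) (hrect : RectW w t) (c : Nat) (hc : c < w) :
    colAt (sScanG t).1 c = (sscanM (colAt t c)).1 := by
  induction t with
  | nil => simp [sScanG, colAt, sscanM]
  | cons x xs ih =>
    have hxw : x.length = w := hrect x (by simp)
    have hxs : RectW w xs := fun r hr => hrect r (by simp [hr])
    rcases hs : sScanG xs with ⟨s1, f⟩
    rcases s1 with _ | ⟨y, rest⟩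
    · have hxse : xs = [] := by
        have := length_sScanG xs
        rw [hs] at this
        simpa using this.symm
      subst hxse
      rw [show sScanG [x] = ([x], false) from rfl]
      simp [colAt, sscanM]
    · have hrecrect : RectW w (y :: rest) := by
        have h1 := rectW_sScanG (w := w) (t := xs) hxs
        rwa [hs] at h1
      have hyw : y.length = w := hrecrect y List.mem_cons_self
      rcases hsc : sscanM (colAt xs c) with ⟨s1c, fc⟩
      have hcol : s1c = y.getD c "" :: colAt rest c := by
        have h1 := ih hxs
        rw [hs, hsc] at h1
        simpa [colAt_cons] using h1.symm
      subst hcol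
      rw [show sScanG (x :: xs) = ((comb y x).1.2 :: (comb y x).1.1 :: rest, (comb y x).2 || f) from by
        rw [sScanG, hs]]
      simp only [colAt_cons]
      rw [sscanM_cons_eq (x.getD c "") hsc]
      rw [comb_fst_getD y x c (by omega), comb_snd_getD y x c (by omega)]

lemma flagS (t : List (List String)) (w : Nat) (hrect : RectW w t) :
    (sScanG t).2 = (List.range w).any (fun c => (sscanM (colAt t c)).2) := by
  induction t with
  | nil => simp [sScanG, colAt, sscanM]
  | cons x xs ih =>
    have hxw : x.length = w := hrect x (by simp)
    have hxs : RectW w xs := fun r hr => hrect r (by simp [hr])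
    rcases hs : sScanG xs with ⟨s1, f⟩
    rcases s1 with _ | ⟨y, rest⟩
    · have hxse : xs = [] := by
        have := length_sScanG xs
        rw [hs] at this
        simpa using this.symm
      subst hxse
      have hf : f = false := by
        have hnil : sScanG ([] : List (List String)) = ([], false) := rfl
        rw [hnil] at hs
        injection hs with h1 h2
        exact h2.symm
      subst hf
      rw [show sScanG [x] = ([x], false) from rfl]
      simp [colAt, sscanM]
    · have hrecrect : RectW w (y :: rest) := by
        have h1 := rectW_sScanG (w := w) (t := xs) hxs
        rwa [hs] at h1
      have hyw : y.length = w := hrecrect y List.mem_cons_self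
      rw [show sScanG (x :: xs) = ((comb y x).1.2 :: (comb y x).1.1 :: rest, (comb y x).2 || f) from by
        rw [sScanG, hs]]
      dsimp only
      have hof : f = (List.range w).any (fun c => (sscanM (colAt xs c)).2) := by
        have h1 := ih hxs
        rwa [hs] at h1
      rw [hof, comb_flag_any y x w hyw hxw]
      have hsplit := any_or_distrib (List.range w)
        (fun c => decide (x.getD c "" = "O" ∧ y.getD c "" = "."))
        (fun c => (sscanM (colAt xs c)).2)
      rw [← hsplit]
      apply any_congr
      intro c hcm
      have hc : c < w := List.mem_range.1 hcm
      rcases hsc : sscanM (colAt xs c) with ⟨s1c, fc⟩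
      have hcol : s1c = y.getD c "" :: colAt rest c := by
        have h1 := colS xs w hxs c hc
        rw [hs, hsc] at h1
        simpa [colAt_cons] using h1.symm
      subst hcol
      simp only [colAt_cons]
      rw [sscanM_cons_eq (x.getD c "") hsc]


-- ---------- shape bookkeeping and the four tilt stages ----------

lemma length_colAt (t : List (List String)) (c : Nat) : (colAt t c).length = t.length := by
  simp [colAt]

lemma pvWidth_rect (t : List (List String)) (w : Nat) (hr : RectW w t) (hne : t ≠ []) :
    pvWidth t = w := by
  cases t with
  | nil => exact absurd rfl hne
  | cons x xs => exact hr x List.mem_cons_self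

lemma pvTr_cols (t : List (List String)) :
    pvTr t = (List.range (pvWidth t)).map (fun c => colAt t c) := rfl

lemma grid_ext (s s' : List (List String)) (w : Nat) (h1 : s.length = s'.length)
    (hr : RectW w s) (hr' : RectW w s') (hc : ∀ c, c < w → colAt s c = colAt s' c) : s = s' := by
  apply List.ext_getElem h1
  intro r hrs hrs'
  have hl1 : s[r].length = w := hr _ (List.getElem_mem hrs)
  have hl2 : s'[r].length = w := hr' _ (List.getElem_mem hrs')
  apply List.ext_getElem (by rw [hl1, hl2])
  intro c hc1 hc2
  have hcw : c < w := by omega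
  have h3 : (colAt s c)[r]? = (colAt s' c)[r]? := by rw [hc c hcw]
  simp only [colAt, List.getElem?_map, List.getElem?_eq_getElem hrs,
    List.getElem?_eq_getElem hrs', Option.map_some] at h3
  injection h3 with h4
  rw [← List.getD_eq_getElem s[r] "" hc1, ← List.getD_eq_getElem s'[r] "" hc2, h4]

lemma pvTr_length (X : List (List String)) : (pvTr X).length = pvWidth X := by
  simp [pvTr, pvWidth]

lemma pvTr_rect (X : List (List String)) : RectW X.length (pvTr X) := by
  intro r hr
  simp only [pvTr, List.mem_map] at hr
  obtain ⟨c, -, rfl⟩ := hr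
  simp

lemma getElem_pvTr (X : List (List String)) (r : Nat) (hrr : r < (pvTr X).length) :
    (pvTr X)[r] = X.map (fun col => col.getD r "") := by
  have hr2 : r < pvWidth X := by rwa [pvTr_length] at hrr
  simp [pvTr, pvWidth] at hr2 ⊢

lemma pvTr_pvTr (t : List (List String)) (w : Nat) (hr : RectW w t) (hne : t ≠ []) (hw : 0 < w) :
    pvTr (pvTr t) = t := by
  have hwt : pvWidth t = w := pvWidth_rect t w hr hne
  have hW : pvWidth (pvTr t) = t.length := by
    obtain ⟨w', rfl⟩ : ∃ w', w = w' + 1 := ⟨w - 1, by omega⟩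
    rw [pvTr_cols, hwt, List.range_succ_eq_map, List.map_cons]
    simp [pvWidth, length_colAt]
  apply List.ext_getElem (by rw [pvTr_length, hW])
  intro r h1 h2
  rw [getElem_pvTr (pvTr t) r h1, pvTr_cols, hwt, List.map_map]
  have hrow : t[r].length = w := hr _ (List.getElem_mem h2)
  have : ((fun col => col.getD r "") ∘ fun c => colAt t c) = fun c => t[r].getD c "" := by
    funext c
    simp only [Function.comp, colAt]
    rw [List.getD_eq_getElem _ "" (by simpa using h2), List.getElem_map]
  rw [this, ← hrow, getD_range_map_self]

lemma packN_cols (s : List (List String)) (w : Nat) (hr : RectW w s) (hne : s ≠ []) :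
    pvTr ((pvTr s).map packF) = pvTr ((List.range w).map (fun c => packF (colAt s c))) := by
  rw [pvTr_cols s, pvWidth_rect s w hr hne, List.map_map]
  rfl

lemma packS_cols (s : List (List String)) (w : Nat) (hr : RectW w s) (hne : s ≠ []) :
    pvTr ((pvTr s).map packB) = pvTr ((List.range w).map (fun c => packB (colAt s c))) := by
  rw [pvTr_cols s, pvWidth_rect s w hr hne, List.map_map]
  rfl

lemma ne_nil_of_length_pos {α : Type} {l : List α} (h : 0 < l.length) : l ≠ [] := by
  cases l
  · simp at h
  · simp

lemma stageN (t : List (List String)) (w : Nat) (hr : RectW w t) (hne : t ≠ []) (hw : 0 < w) :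
    pvWhile pvSweepN (gmeasN t + 1) t = pvTr ((pvTr t).map packF) := by
  have hlen0 : 0 < t.length := List.length_pos_iff.2 hne
  refine pvWhile_eq_pack pvSweepN (fun s => pvTr ((pvTr s).map packF)) gmeasN
      (fun s => s.length = t.length ∧ RectW w s) ?_ ?_ ?_ ?_ (gmeasN t + 1) t ⟨rfl, hr⟩ (by omega)
  · rintro s ⟨hlen, hrs⟩
    rw [sweepN_eq s w hrs]
    exact ⟨by rw [← hlen]; exact length_nScanG s, rectW_nScanG hrs⟩
  · rintro s ⟨hlen, hrs⟩
    have hsne : s ≠ [] := ne_nil_of_length_pos (by omega)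
    rw [sweepN_eq s w hrs]
    dsimp only
    have h1 : RectW w (nScanG s).1 := rectW_nScanG hrs
    have h2 : (nScanG s).1.length = s.length := length_nScanG s
    rw [packN_cols _ w h1 (ne_nil_of_length_pos (by omega)), packN_cols s w hrs hsne]
    congr 1
    apply List.map_congr_left
    intro c hcm
    rw [colN s w hrs c (List.mem_range.1 hcm), packF_scanM]
  · rintro s ⟨hlen, hrs⟩ hflag
    have hsne : s ≠ [] := ne_nil_of_length_pos (by omega)
    rw [sweepN_eq s w hrs] at hflag ⊢
    dsimp only at hflag ⊢
    rw [flagN s w hrs] at hflag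
    have hcols := List.any_eq_false.1 hflag
    have hfix : ∀ c, c < w → (scanM (colAt s c)).1 = colAt s c ∧ packF (colAt s c) = colAt s c := by
      intro c hcw
      exact scanM_fix _ (by simpa using hcols c (List.mem_range.2 hcw))
    constructor
    · exact grid_ext _ s w (length_nScanG s) (rectW_nScanG hrs) hrs
        (fun c hcw => by rw [colN s w hrs c hcw, (hfix c hcw).1])
    · rw [packN_cols s w hrs hsne,
        show (List.range w).map (fun c => packF (colAt s c)) = (List.range w).map (colAt s) from
          List.map_congr_left (fun c hcm => (hfix c (List.mem_range.1 hcm)).2),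
        show (List.range w).map (colAt s) = pvTr s from by
          rw [pvTr_cols s, pvWidth_rect s w hrs hsne],
        pvTr_pvTr s w hrs hsne hw]
  · rintro s ⟨hlen, hrs⟩ hflag
    have hsne : s ≠ [] := ne_nil_of_length_pos (by omega)
    rw [sweepN_eq s w hrs] at hflag ⊢
    dsimp only at hflag ⊢
    rw [flagN s w hrs] at hflag
    obtain ⟨c0, hc0m, hc0⟩ := List.any_eq_true.1 hflag
    unfold gmeasN
    rw [pvWidth_rect _ w (rectW_nScanG hrs) (ne_nil_of_length_pos (by
      rw [length_nScanG]; omega)), pvWidth_rect s w hrs hsne]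
    apply List.sum_lt_sum
    · intro c hcm
      rw [colN s w hrs c (List.mem_range.1 hcm)]
      have := measF_scanM (colAt s c)
      omega
    · refine ⟨c0, hc0m, ?_⟩
      rw [colN s w hrs c0 (List.mem_range.1 hc0m)]
      have := measF_scanM (colAt s c0)
      rw [hc0] at this
      simp at this
      omega

lemma stageS (t : List (List String)) (w : Nat) (hr : RectW w t) (hne : t ≠ []) (hw : 0 < w) :
    pvWhile pvSweepS (gmeasS t + 1) t = pvTr ((pvTr t).map packB) := by
  have hlen0 : 0 < t.length := List.length_pos_iff.2 hne
  refine pvWhile_eq_pack pvSweepS (fun s => pvTr ((pvTr s).map packB)) gmeasS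
      (fun s => s.length = t.length ∧ RectW w s) ?_ ?_ ?_ ?_ (gmeasS t + 1) t ⟨rfl, hr⟩ (by omega)
  · rintro s ⟨hlen, hrs⟩
    rw [sweepS_eq s w hrs]
    exact ⟨by rw [← hlen]; exact length_sScanG s, rectW_sScanG hrs⟩
  · rintro s ⟨hlen, hrs⟩
    have hsne : s ≠ [] := ne_nil_of_length_pos (by omega)
    rw [sweepS_eq s w hrs]
    dsimp only
    have h1 : RectW w (sScanG s).1 := rectW_sScanG hrs
    have h2 : (sScanG s).1.length = s.length := length_sScanG s
    rw [packS_cols _ w h1 (ne_nil_of_length_pos (by omega)), packS_cols s w hrs hsne]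
    congr 1
    apply List.map_congr_left
    intro c hcm
    rw [colS s w hrs c (List.mem_range.1 hcm), packB_sscanM]
  · rintro s ⟨hlen, hrs⟩ hflag
    have hsne : s ≠ [] := ne_nil_of_length_pos (by omega)
    rw [sweepS_eq s w hrs] at hflag ⊢
    dsimp only at hflag ⊢
    rw [flagS s w hrs] at hflag
    have hcols := List.any_eq_false.1 hflag
    have hfix : ∀ c, c < w → (sscanM (colAt s c)).1 = colAt s c ∧ packB (colAt s c) = colAt s c := by
      intro c hcw
      exact sscanM_fix _ (by simpa using hcols c (List.mem_range.2 hcw))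
    constructor
    · exact grid_ext _ s w (length_sScanG s) (rectW_sScanG hrs) hrs
        (fun c hcw => by rw [colS s w hrs c hcw, (hfix c hcw).1])
    · rw [packS_cols s w hrs hsne,
        show (List.range w).map (fun c => packB (colAt s c)) = (List.range w).map (colAt s) from
          List.map_congr_left (fun c hcm => (hfix c (List.mem_range.1 hcm)).2),
        show (List.range w).map (colAt s) = pvTr s from by
          rw [pvTr_cols s, pvWidth_rect s w hrs hsne],
        pvTr_pvTr s w hrs hsne hw]
  · rintro s ⟨hlen, hrs⟩ hflag
    have hsne : s ≠ [] := ne_nil_of_length_pos (by omega)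
    rw [sweepS_eq s w hrs] at hflag ⊢
    dsimp only at hflag ⊢
    rw [flagS s w hrs] at hflag
    obtain ⟨c0, hc0m, hc0⟩ := List.any_eq_true.1 hflag
    unfold gmeasS
    rw [pvWidth_rect _ w (rectW_sScanG hrs) (ne_nil_of_length_pos (by
      rw [length_sScanG]; omega)), pvWidth_rect s w hrs hsne]
    apply List.sum_lt_sum
    · intro c hcm
      rw [colS s w hrs c (List.mem_range.1 hcm)]
      have := measB_sscanM (colAt s c)
      omega
    · refine ⟨c0, hc0m, ?_⟩
      rw [colS s w hrs c0 (List.mem_range.1 hc0m)]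
      have := measB_sscanM (colAt s c0)
      rw [hc0] at this
      simp at this
      omega

lemma stageW (t : List (List String)) :
    pvWhile pvSweepW (gmeasW t + 1) t = t.map packF := by
  refine pvWhile_eq_pack pvSweepW (fun s => s.map packF) gmeasW (fun _ => True)
      (fun _ _ => trivial) ?_ ?_ ?_ (gmeasW t + 1) t trivial (by omega)
  · intro s _
    rw [sweepW_eq s]
    dsimp only
    rw [List.map_map]
    exact List.map_congr_left (fun r _ => packF_scanM r)
  · intro s _ hflag
    rw [sweepW_eq s] at hflag ⊢
    dsimp only at hflag ⊢
    have hrows := List.any_eq_false.1 hflag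
    have hfix : ∀ r ∈ s, (scanM r).1 = r ∧ packF r = r :=
      fun r hr => scanM_fix r (by simpa using hrows r hr)
    constructor
    · rw [show s.map (fun r => (scanM r).1) = s.map id from
        List.map_congr_left (fun r hr => (hfix r hr).1), List.map_id]
    · rw [show s.map packF = s.map id from
        List.map_congr_left (fun r hr => (hfix r hr).2), List.map_id]
  · intro s _ hflag
    rw [sweepW_eq s] at hflag ⊢
    dsimp only at hflag ⊢
    obtain ⟨r0, hr0m, hr0⟩ := List.any_eq_true.1 hflag
    unfold gmeasW
    rw [List.map_map]
    apply List.sum_lt_sum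
    · intro r hrm
      have := measF_scanM r
      simp only [Function.comp]
      omega
    · refine ⟨r0, hr0m, ?_⟩
      have := measF_scanM r0
      rw [hr0] at this
      simp only [Function.comp]
      simp at this
      omega

lemma stageE (t : List (List String)) :
    pvWhile pvSweepE (gmeasE t + 1) t = t.map packB := by
  refine pvWhile_eq_pack pvSweepE (fun s => s.map packB) gmeasE (fun _ => True)
      (fun _ _ => trivial) ?_ ?_ ?_ (gmeasE t + 1) t trivial (by omega)
  · intro s _
    rw [sweepE_eq s]
    dsimp only
    rw [List.map_map]
    exact List.map_congr_left (fun r _ => packB_eScanM r)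
  · intro s _ hflag
    rw [sweepE_eq s] at hflag ⊢
    dsimp only at hflag ⊢
    have hrows := List.any_eq_false.1 hflag
    have hfix : ∀ r ∈ s, (eScanM r).1 = r ∧ packB r = r :=
      fun r hr => eScanM_fix r (by simpa using hrows r hr)
    constructor
    · rw [show s.map (fun r => (eScanM r).1) = s.map id from
        List.map_congr_left (fun r hr => (hfix r hr).1), List.map_id]
    · rw [show s.map packB = s.map id from
        List.map_congr_left (fun r hr => (hfix r hr).2), List.map_id]
  · intro s _ hflag
    rw [sweepE_eq s] at hflag ⊢
    dsimp only at hflag ⊢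
    obtain ⟨r0, hr0m, hr0⟩ := List.any_eq_true.1 hflag
    unfold gmeasE
    rw [List.map_map]
    apply List.sum_lt_sum
    · intro r hrm
      have := measB_eScanM r
      simp only [Function.comp]
      omega
    · refine ⟨r0, hr0m, ?_⟩
      have := measB_eScanM r0
      rw [hr0] at this
      simp only [Function.comp]
      simp at this
      omega


-- ---------- assembling the four stages into the whole cycle ----------

lemma packLoop_true_fun : packLoop true = packF := funext packLoop_true

lemma packLoop_false_fun : packLoop false = packB := funext packLoop_false

lemma pvWhile_fixed {α : Type} (step : α → α × Bool) (fuel : Nat) (s : α)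
    (h : step s = (s, false)) : pvWhile step (fuel + 1) s = s := by
  simp [pvWhile, h]

lemma trmap_shape (t : List (List String)) (w : Nat) (f : List String → List String)
    (hf : ∀ l : List String, (f l).length = l.length) (hr : RectW w t) (hne : t ≠ [])
    (hw : 0 < w) :
    (pvTr ((pvTr t).map f)).length = t.length ∧ RectW w (pvTr ((pvTr t).map f)) := by
  have hcols : pvTr ((pvTr t).map f) = pvTr ((List.range w).map (fun c => f (colAt t c))) := by
    rw [pvTr_cols t, pvWidth_rect t w hr hne, List.map_map]; rfl
  obtain ⟨w', rfl⟩ : ∃ w', w = w' + 1 := ⟨w - 1, by omega⟩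
  have hWX : pvWidth ((List.range (w' + 1)).map (fun c => f (colAt t c))) = t.length := by
    rw [List.range_succ_eq_map, List.map_cons]
    simp [pvWidth, hf, length_colAt]
  constructor
  · rw [hcols, pvTr_length, hWX]
  · rw [hcols]
    have h3 := pvTr_rect ((List.range (w' + 1)).map (fun c => f (colAt t c)))
    simpa using h3

lemma rect_map (t : List (List String)) (w : Nat) (f : List String → List String)
    (hf : ∀ l : List String, (f l).length = l.length) (hr : RectW w t) :
    RectW w (t.map f) := by
  intro r hrm
  rw [List.mem_map] at hrm
  obtain ⟨row, hrow, rfl⟩ := hrm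
  rw [hf]
  exact hr row hrow

lemma pvRocks_nil_of_noO (r : List String) (h : ¬ "O" ∈ r) : pvRocks r = [] := by
  unfold pvRocks
  rw [List.filter_eq_nil_iff]
  intro c hc
  simp only [decide_eq_true_eq]
  intro hO
  apply h
  rw [← hO]
  have hlt : c < r.length := List.mem_range.1 hc
  rw [List.getD_eq_getElem r "" hlt]
  exact List.getElem_mem hlt

lemma sweep_noO_fold (t : List (List String)) (hA : ∀ r ∈ t, pvRocks r = [])
    (inner : Nat → List (List String) × Bool → Nat → List (List String) × Bool) :
    ∀ (l : List Nat),
      l.foldl (fun s (row : Nat) => (pvRocks (s.1.getD row [])).foldl (inner row) s) (t, false) =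
        (t, false) := by
  intro l
  induction l with
  | nil => rfl
  | cons row l ih =>
    rw [List.foldl_cons]
    have hrow : pvRocks ((t, false).1.getD row []) = [] := by
      show pvRocks (t.getD row []) = []
      by_cases hlt : row < t.length
      · exact hA _ (by rw [List.getD_eq_getElem t [] hlt]; exact List.getElem_mem hlt)
      · rw [List.getD_eq_getElem?_getD, List.getElem?_eq_none (by omega)]
        rfl
    rw [hrow]
    exact ih

lemma cycle_noO (t : List (List String)) (h : ∀ r ∈ t, ¬ "O" ∈ r) : cycle t = t := by
  have hA : ∀ r ∈ t, pvRocks r = [] := fun r hr => pvRocks_nil_of_noO r (h r hr)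
  have hN : pvSweepN t = (t, false) := sweep_noO_fold t hA _ _
  have hW : pvSweepW t = (t, false) := sweep_noO_fold t hA _ _
  have hS : pvSweepS t = (t, false) := sweep_noO_fold t hA _ _
  have hE : pvSweepE t = (t, false) := sweep_noO_fold t hA _ _
  show cycle t = t
  unfold cycle
  dsimp only
  rw [pvWhile_fixed pvSweepN (gmeasN t) t hN, pvWhile_fixed pvSweepW (gmeasW t) t hW,
    pvWhile_fixed pvSweepS (gmeasS t) t hS, pvWhile_fixed pvSweepE (gmeasE t) t hE]

-- ===== VERDICT (by name: the statement is the Claim_ definition above) =====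
theorem cycle_spec : Claim_equal_cycle := by
  unfold Claim_equal_cycle
  intro t _ hpre
  unfold Spec_cycle
  by_cases hno : t.any (fun row => row.contains "O") = true
  · -- there is a rock somewhere, so Pre_cycle forces the table to be rectangular
    have hrectb : (t.all (fun row => row.length == (t.headD []).length)) = true := by
      unfold Pre_cycle at hpre
      rcases Bool.or_eq_true_iff.1 hpre with h | h
      · exact h
      · exfalso
        rw [Bool.not_eq_true'] at h
        rw [h] at hno
        simp at hno
    have hrect : RectW (pvWidth t) t := by
      intro r hr
      have h2 := List.all_eq_true.1 hrectb r hr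
      simpa [pvWidth] using h2
    obtain ⟨r0, hr0, hc0⟩ := List.any_eq_true.1 hno
    have h0 : t ≠ [] := by
      intro h
      subst h
      simp at hr0
    have hw : 0 < pvWidth t := by
      have hlen := hrect r0 hr0
      have hne0 : r0 ≠ [] := by
        intro h
        subst h
        simp at hc0
      have := List.length_pos_iff.2 hne0
      omega
    have hlen0 : 0 < t.length := List.length_pos_iff.2 h0
    have h1 := stageN t (pvWidth t) hrect h0 hw
    obtain ⟨hlen1, hrect1⟩ := trmap_shape t (pvWidth t) packF length_packF hrect h0 hw
    have hne1 : pvTr ((pvTr t).map packF) ≠ [] := ne_nil_of_length_pos (by omega)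
    have h2 := stageW (pvTr ((pvTr t).map packF))
    have hlen2 : ((pvTr ((pvTr t).map packF)).map packF).length = t.length := by
      rw [List.length_map]; omega
    have hrect2 : RectW (pvWidth t) ((pvTr ((pvTr t).map packF)).map packF) :=
      rect_map _ _ packF length_packF hrect1
    have hne2 : (pvTr ((pvTr t).map packF)).map packF ≠ [] := ne_nil_of_length_pos (by omega)
    have h3 := stageS ((pvTr ((pvTr t).map packF)).map packF) (pvWidth t) hrect2 hne2 hw
    have h4 := stageE (pvTr ((pvTr ((pvTr ((pvTr t).map packF)).map packF)).map packB))
    show cycle t = cycle_alt t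
    unfold cycle cycle_alt
    dsimp only
    rw [if_neg (by
      rintro (hh | hh | hh)
      · exact h0 hh
      · have hz : pvWidth t = 0 := by
          unfold pvWidth
          rw [hh]
          rfl
        omega
      · rw [hno] at hh
        exact Bool.true_eq_false.mp hh)]
    rw [packLoop_true_fun, packLoop_false_fun]
    rw [h1, h2, h3, h4]
  · -- no rock anywhere: both sides return the table unchanged
    have hnoO : ∀ r ∈ t, ¬ "O" ∈ r := by
      intro r hr hc
      exact hno (List.any_eq_true.2 ⟨r, hr, by simpa using hc⟩)
    rw [cycle_noO t hnoO]
    unfold cycle_alt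
    rw [if_pos (Or.inr (Or.inr (Bool.eq_false_iff.2 hno)))]
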